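-- pv_equiv track=rewrite | github.com/isndotbiz/ged | archive/legacy-scripts/comprehensive_gedcom_processor.py | _standardize_date_value
-- ===== SOURCE A (Python) =====
-- def _standardize_date_value(date_value: str) -> str:
--     """Standardize a single date value."""
--     if not date_value:
--         return date_value
--
--     # Convert to uppercase for month names
--     result = date_value.upper().strip()
--
--     # Remove extra spaces
--     result = ' '.join(result.split())
--
--     # Standard month abbreviations
--     month_map = {
--         'JANUARY': 'JAN', 'FEBRUARY': 'FEB', 'MARCH': 'MAR',
--         'APRIL': 'APR', 'MAY': 'MAY', 'JUNE': 'JUN',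
--         'JULY': 'JUL', 'AUGUST': 'AUG', 'SEPTEMBER': 'SEP',
--         'OCTOBER': 'OCT', 'NOVEMBER': 'NOV', 'DECEMBER': 'DEC'
--     }
--
--     for full_month, abbrev in month_map.items():
--         result = result.replace(full_month, abbrev)
--
--     return result
-- ===== SOURCE B (Python) =====
-- def _standardize_date_value(date_value: str) -> str:
--     """Standardize a single date value (single left-to-right scan)."""
--     if not date_value:
--         return date_value
--
--     result = ' '.join(date_value.upper().strip().split())
--
--     months = [
--         ('JANUARY', 'JAN'), ('FEBRUARY', 'FEB'), ('MARCH', 'MAR'),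
--         ('APRIL', 'APR'), ('MAY', 'MAY'), ('JUNE', 'JUN'),
--         ('JULY', 'JUL'), ('AUGUST', 'AUG'), ('SEPTEMBER', 'SEP'),
--         ('OCTOBER', 'OCT'), ('NOVEMBER', 'NOV'), ('DECEMBER', 'DEC'),
--     ]
--
--     out = []
--     i, n = 0, len(result)
--     while i < n:
--         for full, abbrev in months:
--             if result.startswith(full, i):
--                 out.append(abbrev)
--                 i += len(full)
--                 break
--         else:
--             out.append(result[i])
--             i += 1
--     return ''.join(out)
-- ===== Notes on version B (the rewrite author's own statement) =====
-- stated objective: alternative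
-- what changed: Replaces the twelve sequential full-string str.replace passes with a single left-to-right scan that, at each position, matches the month table once and emits either the abbreviation or the character.
-- intended difference: On inputs whose normalized text contains 'JANUARYOVEMBER' or 'JUNEOVEMBER', A's sequential replacement cascades (the inserted 'JAN'/'JUN' plus the following 'OVEMBER' form a new 'NOVEMBER' that a later pass also abbreviates, so A('JUNEOVEMBER')='JUNOV'), while B abbreviates only month names present in the input ('JUNOVEMBER'), which is the intended behaviour. — e.g. on _standardize_date_value("JUNEOVEMBER"): A returns "JUNOV", B returns "JUNOVEMBER"
import Mathlib
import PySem

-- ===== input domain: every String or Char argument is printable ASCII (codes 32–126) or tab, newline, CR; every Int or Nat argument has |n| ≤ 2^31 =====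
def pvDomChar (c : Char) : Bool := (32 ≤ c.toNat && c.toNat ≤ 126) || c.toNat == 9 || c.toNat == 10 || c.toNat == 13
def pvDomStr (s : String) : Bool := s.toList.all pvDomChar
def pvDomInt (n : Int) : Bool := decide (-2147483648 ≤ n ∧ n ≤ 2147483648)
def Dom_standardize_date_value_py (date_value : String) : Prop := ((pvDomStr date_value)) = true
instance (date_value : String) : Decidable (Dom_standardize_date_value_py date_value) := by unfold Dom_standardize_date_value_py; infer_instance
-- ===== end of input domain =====

-- B replaces A's twelve sequential str.replace passes by one left-to-right scan over a month
-- table (objective: alternative); on the rare inputs where A's sequential passes cascade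
-- (see D_ below) B keeps the intended single-substitution behaviour.

-- ===== PORT A =====
-- month_map is a literal dict with twelve distinct keys; .items() iterates it in insertion
-- order, so it is ported as this association list.
def pvMonthsS : List (String × String) :=
  [("JANUARY", "JAN"), ("FEBRUARY", "FEB"), ("MARCH", "MAR"),
   ("APRIL", "APR"), ("MAY", "MAY"), ("JUNE", "JUN"),
   ("JULY", "JUL"), ("AUGUST", "AUG"), ("SEPTEMBER", "SEP"),
   ("OCTOBER", "OCT"), ("NOVEMBER", "NOV"), ("DECEMBER", "DEC")]

def standardize_date_value_py (date_value : String) : String :=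
  if date_value = "" then date_value
  else
    let result := PySem.Str.join " " (PySem.Str.split₀ (PySem.Str.strip (PySem.Str.upper date_value)))
    pvMonthsS.foldl (fun r p => PySem.Str.replace r p.1 p.2) result

-- ===== PORT B =====
def pvMonthsC : List (List Char × List Char) :=
  [("JANUARY".toList, "JAN".toList), ("FEBRUARY".toList, "FEB".toList), ("MARCH".toList, "MAR".toList),
   ("APRIL".toList, "APR".toList), ("MAY".toList, "MAY".toList), ("JUNE".toList, "JUN".toList),
   ("JULY".toList, "JUL".toList), ("AUGUST".toList, "AUG".toList), ("SEPTEMBER".toList, "SEP".toList),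
   ("OCTOBER".toList, "OCT".toList), ("NOVEMBER".toList, "NOV".toList), ("DECEMBER".toList, "DEC".toList)]

-- the inner `for full, abbrev in months: if result.startswith(full, i): … break / else: …`
def pvFirstMatch : List (List Char × List Char) → List Char → Option (List Char × List Char)
  | [], _ => none
  | (m, a) :: rest, l => if m.isPrefixOf l then some (a, l.drop m.length) else pvFirstMatch rest l

-- the `while i < n` loop, with fuel = n (each iteration consumes at least one character)
def pvScanGo : Nat → List Char → List Char
  | 0, _ => []
  | n + 1, l =>
    match pvFirstMatch pvMonthsC l with
    | some (a, r) => a ++ pvScanGo n r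
    | none =>
      match l with
      | [] => []
      | c :: t => c :: pvScanGo n t

def standardize_date_value_py_alt (date_value : String) : String :=
  if date_value = "" then date_value
  else
    let result := PySem.Str.join " " (PySem.Str.split₀ (PySem.Str.strip (PySem.Str.upper date_value)))
    String.ofList (pvScanGo result.toList.length result.toList)

-- ===== PRECONDITION & SPEC =====
-- the normalization both programs perform: ' '.join(s.upper().strip().split()), on char lists
def pvNorm (date_value : String) : List Char :=
  PySem.Chars.join " ".toList (PySem.Chars.split₀ (PySem.Chars.strip (PySem.Chars.upper date_value.toList)))

-- On inputs whose normalized text contains "JANUARYOVEMBER" or "JUNEOVEMBER", A's sequential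
-- replacement cascades (the inserted "JAN"/"JUN" plus the following "OVEMBER" form a new
-- "NOVEMBER" that A's later pass also abbreviates, so A returns e.g. "JUNOV"), while B
-- abbreviates only month names present in the input ("JUNOVEMBER"), the intended behaviour.
def D_standardize_date_value_py (date_value : String) : Prop :=
  PySem.Chars.isIn "JANUARYOVEMBER".toList (pvNorm date_value) = true ∨
  PySem.Chars.isIn "JUNEOVEMBER".toList (pvNorm date_value) = true
instance (date_value : String) : Decidable (D_standardize_date_value_py date_value) := by
  unfold D_standardize_date_value_py; infer_instance

def Spec_standardize_date_value_py (date_value : String) (out : String) : Prop :=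
  ¬ D_standardize_date_value_py date_value → out = standardize_date_value_py_alt date_value
instance (date_value : String) (out : String) : Decidable (Spec_standardize_date_value_py date_value out) := by
  unfold Spec_standardize_date_value_py; infer_instance

def pvDiffWitness_standardize_date_value_py : String := "JUNEOVEMBER"
def pvDiffWitnessOut_standardize_date_value_py : String × String := ("JUNOV", "JUNOVEMBER")

-- ===== CLAIM (what is proved, stated in full; the proofs are below) =====
def Claim_unchanged_standardize_date_value_py : Prop := ∀ (date_value : String), Dom_standardize_date_value_py date_value → Spec_standardize_date_value_py date_value (standardize_date_value_py date_value)
def Claim_changed_standardize_date_value_py : Prop := Dom_standardize_date_value_py (pvDiffWitness_standardize_date_value_py) ∧ D_standardize_date_value_py (pvDiffWitness_standardize_date_value_py) ∧ standardize_date_value_py (pvDiffWitness_standardize_date_value_py) = pvDiffWitnessOut_standardize_date_value_py.1 ∧ standardize_date_value_py_alt (pvDiffWitness_standardize_date_value_py) = pvDiffWitnessOut_standardize_date_value_py.2 ∧ pvDiffWitnessOut_standardize_date_value_py.1 ≠ pvDiffWitnessOut_standardize_date_value_py.2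
def Claim_exact_standardize_date_value_py : Prop := ∀ (date_value : String), Dom_standardize_date_value_py date_value → D_standardize_date_value_py date_value → standardize_date_value_py date_value ≠ standardize_date_value_py_alt date_value

-- ===== LEMMAS AND PROOFS =====

-- proof-side model of PySem.Chars.replace (nonempty pattern): leftmost, non-overlapping
def pvRep (old new : List Char) (l : List Char) : List Char :=
  match old, l with
  | _, [] => []
  | [], l => l
  | o :: ot, c :: t =>
    if (o :: ot).isPrefixOf (c :: t) then new ++ pvRep (o :: ot) new (t.drop ot.length)
    else c :: pvRep (o :: ot) new t
termination_by l.length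
decreasing_by
  · simp only [List.length_drop, List.length_cons]; omega
  · simp only [List.length_cons]; omega


lemma pvRep_nil (old new : List Char) : pvRep old new [] = [] := by
  cases old <;> simp [pvRep]

lemma pvGoEq (o : Char) (ot new : List Char) :
    ∀ (fuel : Nat) (l acc : List Char), l.length ≤ fuel →
      PySem.Chars.replace.go (o :: ot) new fuel l acc = acc.reverse ++ pvRep (o :: ot) new l := by
  intro fuel
  induction fuel with
  | zero =>
    intro l acc hl
    have : l = [] := List.eq_nil_iff_length_eq_zero.mpr (Nat.le_zero.mp hl)
    subst this
    simp [PySem.Chars.replace.go, pvRep_nil]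
  | succ n ih =>
    intro l acc hl
    cases l with
    | nil => simp [PySem.Chars.replace.go, pvRep_nil]
    | cons c t =>
      by_cases hp : (o :: ot).isPrefixOf (c :: t)
      · rw [PySem.Chars.replace.go]
        simp only [hp, if_true, ite_true]
        rw [ih _ _ (by simp at hl ⊢; omega)]
        rw [pvRep]
        simp [hp, List.drop_succ_cons]
      · rw [PySem.Chars.replace.go]
        simp only [hp, ite_false, Bool.false_eq_true, if_false]
        rw [ih _ _ (by simp at hl ⊢; omega)]
        rw [pvRep]
        simp [hp]

lemma pvReplaceEq (o : Char) (ot new l : List Char) :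
    PySem.Chars.replace l (o :: ot) new = pvRep (o :: ot) new l := by
  rw [PySem.Chars.replace]
  simp only [List.isEmpty_cons, Bool.false_eq_true, if_false]
  simpa using pvGoEq o ot new l.length l [] le_rfl

lemma pvRep_cons_of_not {old : List Char} (new : List Char) {c : Char} {t : List Char}
    (h : ¬ old <+: (c :: t)) : pvRep old new (c :: t) = c :: pvRep old new t := by
  cases old with
  | nil => exact absurd (List.nil_prefix) h
  | cons o ot =>
    rw [pvRep, if_neg (by simpa [List.isPrefixOf_iff_prefix] using h)]

lemma pvRep_left (m : List Char) (hm : m ≠ []) (new u : List Char) :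
    pvRep m new (m ++ u) = new ++ pvRep m new u := by
  cases m with
  | nil => exact absurd rfl hm
  | cons o ot =>
    show pvRep (o :: ot) new (o :: (ot ++ u)) = _
    rw [pvRep, if_pos (by simp [List.isPrefixOf_iff_prefix, List.cons_prefix_cons])]
    rw [List.drop_left]

lemma pvPrefixAppend {m w x : List Char} (h : m <+: w ++ x) : m <+: w ∨ w <+: m := by
  rcases Nat.le_total m.length w.length with hl | hl
  · exact Or.inl ((List.isPrefix_append_of_length hl).mp h)
  · exact Or.inr (List.prefix_of_prefix_length_le (List.prefix_append w x) h hl)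

lemma pvNotPreAppend {m w : List Char} (x : List Char) (h1 : ¬ m <+: w) (h2 : ¬ w <+: m) :
    ¬ m <+: w ++ x := fun h => (pvPrefixAppend h).elim h1 h2

lemma pvRep_nil_pat (a l : List Char) : pvRep [] a l = l := by
  cases l <;> simp [pvRep]

lemma pvRep_skip_cond (m a : List Char) :
    ∀ (w x : List Char), (∀ p, p < w.length → ¬ m <+: w.drop p ++ x) →
      pvRep m a (w ++ x) = w ++ pvRep m a x := by
  intro w
  induction w with
  | nil => intro x _; simp
  | cons c w' ih =>
    intro x h
    have h0 : ¬ m <+: (c :: (w' ++ x)) := by simpa using h 0 (by simp)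
    rw [List.cons_append, pvRep_cons_of_not a h0, ih x (fun p hp => by simpa using h (p+1) (by simp; omega))]
    simp

lemma pvRep_skip (m a w x : List Char)
    (h : ∀ p, p < w.length → ¬ m <+: w.drop p ∧ ¬ w.drop p <+: m) :
    pvRep m a (w ++ x) = w ++ pvRep m a x :=
  pvRep_skip_cond m a w x (fun p hp => pvNotPreAppend x (h p hp).1 (h p hp).2)

lemma pvRep_notPrefix (m a : List Char) :
    ∀ (x w : List Char), ¬ w <+: x →
      (∀ p, p < w.length → ¬ a <+: w.drop p ∧ ¬ w.drop p <+: a) →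
      ¬ w <+: pvRep m a x := by
  suffices H : ∀ (N : Nat) (x w : List Char), x.length ≤ N → ¬ w <+: x →
      (∀ p, p < w.length → ¬ a <+: w.drop p ∧ ¬ w.drop p <+: a) → ¬ w <+: pvRep m a x by
    exact fun x w h1 h2 => H x.length x w le_rfl h1 h2
  intro N
  induction N with
  | zero =>
    intro x w hl h1 _
    have : x = [] := List.eq_nil_iff_length_eq_zero.mpr (Nat.le_zero.mp hl)
    subst this; rw [pvRep_nil]; exact h1
  | succ N ih =>
    intro x w hl h1 h2
    cases x with
    | nil => rw [pvRep_nil]; exact h1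
    | cons c t =>
      have wne : w ≠ [] := by rintro rfl; exact h1 List.nil_prefix
      cases m with
      | nil => rw [pvRep_nil_pat]; exact h1
      | cons o ot =>
        by_cases hpre : (o :: ot) <+: (c :: t)
        · rcases hpre with ⟨u, hu⟩
          rw [← hu, pvRep_left _ (by simp) a u]
          intro hc
          have h0 := h2 0 (List.length_pos_of_ne_nil wne)
          simp only [List.drop_zero] at h0
          exact (pvPrefixAppend hc).elim h0.2 h0.1
        · rw [pvRep_cons_of_not a hpre]
          intro hc
          cases w with
          | nil => exact wne rfl
          | cons d w' =>
            rw [List.cons_prefix_cons] at hc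
            obtain ⟨rfl, hc2⟩ := hc
            have hw' : ¬ w' <+: t := fun hh => h1 (List.cons_prefix_cons.mpr ⟨rfl, hh⟩)
            exact ih t w' (by simpa using Nat.lt_succ_iff.mp (by simpa using hl)) hw'
              (fun p hp => by simpa using h2 (p+1) (by simp; omega)) hc2

lemma pvFold_skip :
    ∀ (ms : List (List Char × List Char)) (w x : List Char),
      (∀ p ∈ ms, ∀ q, q < w.length → ¬ p.1 <+: w.drop q ∧ ¬ w.drop q <+: p.1) →
      ms.foldl (fun s p => pvRep p.1 p.2 s) (w ++ x) = w ++ ms.foldl (fun s p => pvRep p.1 p.2 s) x := by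
  intro ms
  induction ms with
  | nil => intro w x _; simp
  | cons hd rest ih =>
    intro w x h
    simp only [List.foldl_cons]
    rw [pvRep_skip_cond hd.1 hd.2 w x
      (fun p hp => pvNotPreAppend x (h hd (by simp) p hp).1 (h hd (by simp) p hp).2)]
    exact ih w _ (fun p hp => h p (by simp [hp]))

lemma pvFold_notPrefix :
    ∀ (ms : List (List Char × List Char)) (x w : List Char), ¬ w <+: x →
      (∀ p ∈ ms, ∀ q, q < w.length → ¬ p.2 <+: w.drop q ∧ ¬ w.drop q <+: p.2) →
      ¬ w <+: ms.foldl (fun s p => pvRep p.1 p.2 s) x := by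
  intro ms
  induction ms with
  | nil => intro x w h _; simpa using h
  | cons hd rest ih =>
    intro x w h hs
    simp only [List.foldl_cons]
    exact ih _ w (pvRep_notPrefix hd.1 hd.2 x w h (hs hd (by simp))) (fun p hp => hs p (by simp [hp]))

lemma pvFold_cons :
    ∀ (ms : List (List Char × List Char)) (c : Char) (t : List Char),
      (∀ p ∈ ms, ¬ p.1 <+: c :: t) →
      (∀ p ∈ ms, ∀ q ∈ ms, ∀ k, k < p.1.tail.length →
        ¬ q.2 <+: p.1.tail.drop k ∧ ¬ p.1.tail.drop k <+: q.2) →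
      ms.foldl (fun s p => pvRep p.1 p.2 s) (c :: t) = c :: ms.foldl (fun s p => pvRep p.1 p.2 s) t := by
  intro ms
  induction ms with
  | nil => intro c t _ _; simp
  | cons hd rest ih =>
    intro c t h hs
    simp only [List.foldl_cons]
    rw [pvRep_cons_of_not hd.2 (h hd (by simp))]
    refine ih c _ ?_ (fun p hp q hq => hs p (by simp [hp]) q (by simp [hq]))
    intro p hp
    have hpt := h p (by simp [hp])
    cases hp1 : p.1 with
    | nil => rw [hp1] at hpt; exact absurd List.nil_prefix hpt
    | cons d m' =>
      rw [hp1] at hpt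
      by_cases hd' : d = c
      · subst hd'
        intro hcc
        rw [List.cons_prefix_cons] at hcc
        have hm' : ¬ m' <+: t := fun hh => hpt (List.cons_prefix_cons.mpr ⟨rfl, hh⟩)
        refine pvRep_notPrefix hd.1 hd.2 t m' hm' ?_ hcc.2
        have := hs p (by simp [hp]) hd (by simp)
        rw [hp1] at this
        simpa using this
      · intro hcc
        rw [List.cons_prefix_cons] at hcc
        exact hd' hcc.1

-- A's replacement loop, on char lists
def pvChain (l : List Char) : List Char := pvMonthsC.foldl (fun s p => pvRep p.1 p.2 s) l

lemma pvChain_step (P Q : List (List Char × List Char)) (m a u : List Char)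
    (hm : m ≠ [])
    (h1 : ∀ p ∈ P, ∀ q, q < m.length → ¬ p.1 <+: m.drop q ∧ ¬ m.drop q <+: p.1)
    (h2 : ∀ p ∈ Q, ∀ q, q < a.length → ¬ p.1 <+: a.drop q ∧ ¬ a.drop q <+: p.1) :
    (P ++ (m, a) :: Q).foldl (fun s p => pvRep p.1 p.2 s) (m ++ u)
      = a ++ (P ++ (m, a) :: Q).foldl (fun s p => pvRep p.1 p.2 s) u := by
  rw [List.foldl_append, List.foldl_append, List.foldl_cons, List.foldl_cons]
  rw [pvFold_skip P m u h1, pvRep_left m hm a _]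
  exact pvFold_skip Q a _ h2

lemma pvChain_stepN (P Q : List (List Char × List Char)) (m : List Char) (c1 c2 : Char) (u : List Char)
    (hm : m ≠ []) (hc1 : c1 ≠ 'N') (hc2 : c2 ≠ 'N')
    (h1 : ∀ p ∈ P, ∀ q, q < m.length → ¬ p.1 <+: m.drop q ∧ ¬ m.drop q <+: p.1)
    (h2 : ∀ p ∈ Q, ∀ q, q < 3 → ¬ p.1 <+: [c1, c2, 'N'].drop q ∧ ¬ [c1, c2, 'N'].drop q <+: p.1)
    (h3 : ∀ q, q < 3 → ¬ "DECEMBER".toList <+: [c1, c2, 'N'].drop q ∧ ¬ [c1, c2, 'N'].drop q <+: "DECEMBER".toList)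
    (hprop : ∀ p ∈ P ++ (m, [c1, c2, 'N']) :: Q, ∀ q, q < 7 →
      ¬ p.2 <+: "OVEMBER".toList.drop q ∧ ¬ "OVEMBER".toList.drop q <+: p.2)
    (hu : ¬ "OVEMBER".toList <+: u) :
    (P ++ (m, [c1, c2, 'N']) :: Q ++ [("NOVEMBER".toList, "NOV".toList), ("DECEMBER".toList, "DEC".toList)]).foldl
        (fun s p => pvRep p.1 p.2 s) (m ++ u)
      = [c1, c2, 'N'] ++ (P ++ (m, [c1, c2, 'N']) :: Q ++ [("NOVEMBER".toList, "NOV".toList), ("DECEMBER".toList, "DEC".toList)]).foldl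
        (fun s p => pvRep p.1 p.2 s) u := by
  have hOV : "OVEMBER".toList.length = 7 := by decide
  have hshape : "NOVEMBER".toList = 'N' :: "OVEMBER".toList := by decide
  have e1 : ∀ x, (P ++ (m, [c1, c2, 'N']) :: Q ++ [("NOVEMBER".toList, "NOV".toList), ("DECEMBER".toList, "DEC".toList)]).foldl
      (fun s p => pvRep p.1 p.2 s) x
      = pvRep "DECEMBER".toList "DEC".toList (pvRep "NOVEMBER".toList "NOV".toList
          (Q.foldl (fun s p => pvRep p.1 p.2 s) (pvRep m [c1, c2, 'N'] (P.foldl (fun s p => pvRep p.1 p.2 s) x)))) := by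
    intro x; simp [List.foldl_append]
  rw [e1, e1]
  rw [pvFold_skip P m u h1, pvRep_left m hm _ _]
  rw [pvFold_skip Q [c1, c2, 'N'] _ (by simpa using h2)]
  have hPu : ¬ "OVEMBER".toList <+: P.foldl (fun s p => pvRep p.1 p.2 s) u := by
    refine pvFold_notPrefix P u _ hu ?_
    intro p hp q hq; rw [hOV] at hq
    exact hprop p (by simp [hp]) q hq
  have hy : ¬ "OVEMBER".toList <+: pvRep m [c1, c2, 'N'] (P.foldl (fun s p => pvRep p.1 p.2 s) u) := by
    refine pvRep_notPrefix m _ _ _ hPu ?_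
    intro q hq; rw [hOV] at hq
    exact hprop (m, [c1, c2, 'N']) (by simp) q hq
  have hQy : ¬ "OVEMBER".toList <+:
      Q.foldl (fun s p => pvRep p.1 p.2 s) (pvRep m [c1, c2, 'N'] (P.foldl (fun s p => pvRep p.1 p.2 s) u)) := by
    refine pvFold_notPrefix Q _ _ hy ?_
    intro p hp q hq; rw [hOV] at hq
    exact hprop p (by simp [hp]) q hq
  rw [pvRep_skip_cond "NOVEMBER".toList "NOV".toList [c1, c2, 'N'] _ ?_]
  · rw [pvRep_skip_cond "DECEMBER".toList "DEC".toList [c1, c2, 'N'] _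
      (fun q hq => pvNotPreAppend _ (h3 q (by simpa using hq)).1 (h3 q (by simpa using hq)).2)]
  · intro q hq
    simp only [List.length_cons, List.length_nil] at hq
    interval_cases q
    · intro hcon; rw [hshape] at hcon
      simp only [List.drop_zero, List.cons_append, List.cons_prefix_cons] at hcon
      exact hc1 hcon.1.symm
    · intro hcon; rw [hshape] at hcon
      simp only [List.drop_succ_cons, List.drop_zero, List.cons_append, List.cons_prefix_cons] at hcon
      exact hc2 hcon.1.symm
    · intro hcon; rw [hshape] at hcon
      simp only [List.drop_succ_cons, List.drop_zero, List.cons_append, List.nil_append,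
        List.cons_prefix_cons, true_and] at hcon
      exact hQy hcon

lemma pvFirstMatch_skip (m : List Char) (a : List Char) (rest : List (List Char × List Char))
    (l : List Char) (h : m.isPrefixOf l = false) :
    pvFirstMatch ((m, a) :: rest) l = pvFirstMatch rest l := by
  simp [pvFirstMatch, h]

lemma pvFirstMatch_none : ∀ (ms : List (List Char × List Char)) (l : List Char),
    (∀ p ∈ ms, ¬ p.1 <+: l) → pvFirstMatch ms l = none := by
  intro ms
  induction ms with
  | nil => intro l _; rfl
  | cons hd rest ih =>
    intro l h
    obtain ⟨m, a⟩ := hd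
    have hb : m.isPrefixOf l = false := by
      rw [Bool.eq_false_iff]
      intro hb
      exact h (m, a) (by simp) (List.isPrefixOf_iff_prefix.mp hb)
    rw [pvFirstMatch_skip m a rest l hb]
    exact ih l (fun p hp => h p (by simp [hp]))

lemma pvScanGo_succ_some {l a r : List Char} (n : Nat)
    (hfm : pvFirstMatch pvMonthsC l = some (a, r)) :
    pvScanGo (n + 1) l = a ++ pvScanGo n r := by
  simp [pvScanGo, hfm]

lemma pvScanGo_succ_nil (n : Nat) : pvScanGo (n + 1) [] = [] := rfl

lemma pvScanGo_succ_cons (n : Nat) (c : Char) (t : List Char)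
    (hfm : pvFirstMatch pvMonthsC (c :: t) = none) :
    pvScanGo (n + 1) (c :: t) = c :: pvScanGo n t := by
  simp [pvScanGo, hfm]

lemma pvMain : ∀ (n : Nat) (l : List Char), l.length ≤ n →
    ¬ ("JANUARYOVEMBER".toList <:+: l) → ¬ ("JUNEOVEMBER".toList <:+: l) →
    pvChain l = pvScanGo n l := by
  intro n
  induction n with
  | zero =>
    intro l hl _ _
    rw [List.eq_nil_iff_length_eq_zero.mpr (Nat.le_zero.mp hl)]
    simp [pvChain, pvMonthsC, pvRep_nil, pvScanGo]
  | succ n ih =>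
    intro l hlen hbJ hbU
    by_cases hm1 : "JANUARY".toList <+: l
    · obtain ⟨u, rfl⟩ := hm1
      have hfm : pvFirstMatch pvMonthsC ("JANUARY".toList ++ u) = some ("JAN".toList, u) := by
        simp [pvMonthsC, pvFirstMatch]
      rw [pvScanGo_succ_some n hfm]
      have hu : ¬ "OVEMBER".toList <+: u := by
        rintro ⟨t, rfl⟩
        exact hbJ ⟨[], t, by rw [show ("JANUARYOVEMBER".toList : List Char) = "JANUARY".toList ++ "OVEMBER".toList from by decide]; simp⟩
      have hch : pvChain ("JANUARY".toList ++ u) = "JAN".toList ++ pvChain u := by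
        simp only [pvChain]
        rw [show pvMonthsC = [] ++ ("JANUARY".toList, (['J', 'A', 'N'] : List Char)) :: [("FEBRUARY".toList, "FEB".toList), ("MARCH".toList, "MAR".toList), ("APRIL".toList, "APR".toList), ("MAY".toList, "MAY".toList), ("JUNE".toList, "JUN".toList), ("JULY".toList, "JUL".toList), ("AUGUST".toList, "AUG".toList), ("SEPTEMBER".toList, "SEP".toList), ("OCTOBER".toList, "OCT".toList)] ++ [("NOVEMBER".toList, "NOV".toList), ("DECEMBER".toList, "DEC".toList)] from by decide]
        exact pvChain_stepN [] [("FEBRUARY".toList, "FEB".toList), ("MARCH".toList, "MAR".toList), ("APRIL".toList, "APR".toList), ("MAY".toList, "MAY".toList), ("JUNE".toList, "JUN".toList), ("JULY".toList, "JUL".toList), ("AUGUST".toList, "AUG".toList), ("SEPTEMBER".toList, "SEP".toList), ("OCTOBER".toList, "OCT".toList)] "JANUARY".toList 'J' 'A' u (by decide) (by decide) (by decide) (by decide) (by decide) (by decide) (by decide) hu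
      rw [hch]
      refine congrArg (fun z => "JAN".toList ++ z) ?_
      refine ih u ?_ ?_ ?_
      · rw [List.length_append, show ("JANUARY".toList).length = 7 from by decide] at hlen
        omega
      · intro hb; exact hbJ (hb.trans List.infix_append_right)
      · intro hb; exact hbU (hb.trans List.infix_append_right)
    by_cases hm2 : "FEBRUARY".toList <+: l
    · obtain ⟨u, rfl⟩ := hm2
      have hfm : pvFirstMatch pvMonthsC ("FEBRUARY".toList ++ u) = some ("FEB".toList, u) := by
        simp [pvMonthsC, pvFirstMatch]
      rw [pvScanGo_succ_some n hfm]
      have hch : pvChain ("FEBRUARY".toList ++ u) = "FEB".toList ++ pvChain u := by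
        simp only [pvChain]
        rw [show pvMonthsC = [("JANUARY".toList, "JAN".toList)] ++ ("FEBRUARY".toList, "FEB".toList) :: [("MARCH".toList, "MAR".toList), ("APRIL".toList, "APR".toList), ("MAY".toList, "MAY".toList), ("JUNE".toList, "JUN".toList), ("JULY".toList, "JUL".toList), ("AUGUST".toList, "AUG".toList), ("SEPTEMBER".toList, "SEP".toList), ("OCTOBER".toList, "OCT".toList), ("NOVEMBER".toList, "NOV".toList), ("DECEMBER".toList, "DEC".toList)] from by decide]
        exact pvChain_step [("JANUARY".toList, "JAN".toList)] [("MARCH".toList, "MAR".toList), ("APRIL".toList, "APR".toList), ("MAY".toList, "MAY".toList), ("JUNE".toList, "JUN".toList), ("JULY".toList, "JUL".toList), ("AUGUST".toList, "AUG".toList), ("SEPTEMBER".toList, "SEP".toList), ("OCTOBER".toList, "OCT".toList), ("NOVEMBER".toList, "NOV".toList), ("DECEMBER".toList, "DEC".toList)] "FEBRUARY".toList "FEB".toList u (by decide) (by decide) (by decide)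
      rw [hch]
      refine congrArg (fun z => "FEB".toList ++ z) ?_
      refine ih u ?_ ?_ ?_
      · rw [List.length_append, show ("FEBRUARY".toList).length = 8 from by decide] at hlen
        omega
      · intro hb; exact hbJ (hb.trans List.infix_append_right)
      · intro hb; exact hbU (hb.trans List.infix_append_right)
    by_cases hm3 : "MARCH".toList <+: l
    · obtain ⟨u, rfl⟩ := hm3
      have hfm : pvFirstMatch pvMonthsC ("MARCH".toList ++ u) = some ("MAR".toList, u) := by
        simp [pvMonthsC, pvFirstMatch]
      rw [pvScanGo_succ_some n hfm]
      have hch : pvChain ("MARCH".toList ++ u) = "MAR".toList ++ pvChain u := by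
        simp only [pvChain]
        rw [show pvMonthsC = [("JANUARY".toList, "JAN".toList), ("FEBRUARY".toList, "FEB".toList)] ++ ("MARCH".toList, "MAR".toList) :: [("APRIL".toList, "APR".toList), ("MAY".toList, "MAY".toList), ("JUNE".toList, "JUN".toList), ("JULY".toList, "JUL".toList), ("AUGUST".toList, "AUG".toList), ("SEPTEMBER".toList, "SEP".toList), ("OCTOBER".toList, "OCT".toList), ("NOVEMBER".toList, "NOV".toList), ("DECEMBER".toList, "DEC".toList)] from by decide]
        exact pvChain_step [("JANUARY".toList, "JAN".toList), ("FEBRUARY".toList, "FEB".toList)] [("APRIL".toList, "APR".toList), ("MAY".toList, "MAY".toList), ("JUNE".toList, "JUN".toList), ("JULY".toList, "JUL".toList), ("AUGUST".toList, "AUG".toList), ("SEPTEMBER".toList, "SEP".toList), ("OCTOBER".toList, "OCT".toList), ("NOVEMBER".toList, "NOV".toList), ("DECEMBER".toList, "DEC".toList)] "MARCH".toList "MAR".toList u (by decide) (by decide) (by decide)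
      rw [hch]
      refine congrArg (fun z => "MAR".toList ++ z) ?_
      refine ih u ?_ ?_ ?_
      · rw [List.length_append, show ("MARCH".toList).length = 5 from by decide] at hlen
        omega
      · intro hb; exact hbJ (hb.trans List.infix_append_right)
      · intro hb; exact hbU (hb.trans List.infix_append_right)
    by_cases hm4 : "APRIL".toList <+: l
    · obtain ⟨u, rfl⟩ := hm4
      have hfm : pvFirstMatch pvMonthsC ("APRIL".toList ++ u) = some ("APR".toList, u) := by
        simp [pvMonthsC, pvFirstMatch]
      rw [pvScanGo_succ_some n hfm]
      have hch : pvChain ("APRIL".toList ++ u) = "APR".toList ++ pvChain u := by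
        simp only [pvChain]
        rw [show pvMonthsC = [("JANUARY".toList, "JAN".toList), ("FEBRUARY".toList, "FEB".toList), ("MARCH".toList, "MAR".toList)] ++ ("APRIL".toList, "APR".toList) :: [("MAY".toList, "MAY".toList), ("JUNE".toList, "JUN".toList), ("JULY".toList, "JUL".toList), ("AUGUST".toList, "AUG".toList), ("SEPTEMBER".toList, "SEP".toList), ("OCTOBER".toList, "OCT".toList), ("NOVEMBER".toList, "NOV".toList), ("DECEMBER".toList, "DEC".toList)] from by decide]
        exact pvChain_step [("JANUARY".toList, "JAN".toList), ("FEBRUARY".toList, "FEB".toList), ("MARCH".toList, "MAR".toList)] [("MAY".toList, "MAY".toList), ("JUNE".toList, "JUN".toList), ("JULY".toList, "JUL".toList), ("AUGUST".toList, "AUG".toList), ("SEPTEMBER".toList, "SEP".toList), ("OCTOBER".toList, "OCT".toList), ("NOVEMBER".toList, "NOV".toList), ("DECEMBER".toList, "DEC".toList)] "APRIL".toList "APR".toList u (by decide) (by decide) (by decide)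
      rw [hch]
      refine congrArg (fun z => "APR".toList ++ z) ?_
      refine ih u ?_ ?_ ?_
      · rw [List.length_append, show ("APRIL".toList).length = 5 from by decide] at hlen
        omega
      · intro hb; exact hbJ (hb.trans List.infix_append_right)
      · intro hb; exact hbU (hb.trans List.infix_append_right)
    by_cases hm5 : "MAY".toList <+: l
    · obtain ⟨u, rfl⟩ := hm5
      have hfm : pvFirstMatch pvMonthsC ("MAY".toList ++ u) = some ("MAY".toList, u) := by
        simp [pvMonthsC, pvFirstMatch]
      rw [pvScanGo_succ_some n hfm]
      have hch : pvChain ("MAY".toList ++ u) = "MAY".toList ++ pvChain u := by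
        simp only [pvChain]
        rw [show pvMonthsC = [("JANUARY".toList, "JAN".toList), ("FEBRUARY".toList, "FEB".toList), ("MARCH".toList, "MAR".toList), ("APRIL".toList, "APR".toList)] ++ ("MAY".toList, "MAY".toList) :: [("JUNE".toList, "JUN".toList), ("JULY".toList, "JUL".toList), ("AUGUST".toList, "AUG".toList), ("SEPTEMBER".toList, "SEP".toList), ("OCTOBER".toList, "OCT".toList), ("NOVEMBER".toList, "NOV".toList), ("DECEMBER".toList, "DEC".toList)] from by decide]
        exact pvChain_step [("JANUARY".toList, "JAN".toList), ("FEBRUARY".toList, "FEB".toList), ("MARCH".toList, "MAR".toList), ("APRIL".toList, "APR".toList)] [("JUNE".toList, "JUN".toList), ("JULY".toList, "JUL".toList), ("AUGUST".toList, "AUG".toList), ("SEPTEMBER".toList, "SEP".toList), ("OCTOBER".toList, "OCT".toList), ("NOVEMBER".toList, "NOV".toList), ("DECEMBER".toList, "DEC".toList)] "MAY".toList "MAY".toList u (by decide) (by decide) (by decide)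
      rw [hch]
      refine congrArg (fun z => "MAY".toList ++ z) ?_
      refine ih u ?_ ?_ ?_
      · rw [List.length_append, show ("MAY".toList).length = 3 from by decide] at hlen
        omega
      · intro hb; exact hbJ (hb.trans List.infix_append_right)
      · intro hb; exact hbU (hb.trans List.infix_append_right)
    by_cases hm6 : "JUNE".toList <+: l
    · obtain ⟨u, rfl⟩ := hm6
      have hfm : pvFirstMatch pvMonthsC ("JUNE".toList ++ u) = some ("JUN".toList, u) := by
        simp [pvMonthsC, pvFirstMatch]
      rw [pvScanGo_succ_some n hfm]
      have hu : ¬ "OVEMBER".toList <+: u := by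
        rintro ⟨t, rfl⟩
        exact hbU ⟨[], t, by rw [show ("JUNEOVEMBER".toList : List Char) = "JUNE".toList ++ "OVEMBER".toList from by decide]; simp⟩
      have hch : pvChain ("JUNE".toList ++ u) = "JUN".toList ++ pvChain u := by
        simp only [pvChain]
        rw [show pvMonthsC = [("JANUARY".toList, "JAN".toList), ("FEBRUARY".toList, "FEB".toList), ("MARCH".toList, "MAR".toList), ("APRIL".toList, "APR".toList), ("MAY".toList, "MAY".toList)] ++ ("JUNE".toList, (['J', 'U', 'N'] : List Char)) :: [("JULY".toList, "JUL".toList), ("AUGUST".toList, "AUG".toList), ("SEPTEMBER".toList, "SEP".toList), ("OCTOBER".toList, "OCT".toList)] ++ [("NOVEMBER".toList, "NOV".toList), ("DECEMBER".toList, "DEC".toList)] from by decide]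
        exact pvChain_stepN [("JANUARY".toList, "JAN".toList), ("FEBRUARY".toList, "FEB".toList), ("MARCH".toList, "MAR".toList), ("APRIL".toList, "APR".toList), ("MAY".toList, "MAY".toList)] [("JULY".toList, "JUL".toList), ("AUGUST".toList, "AUG".toList), ("SEPTEMBER".toList, "SEP".toList), ("OCTOBER".toList, "OCT".toList)] "JUNE".toList 'J' 'U' u (by decide) (by decide) (by decide) (by decide) (by decide) (by decide) (by decide) hu
      rw [hch]
      refine congrArg (fun z => "JUN".toList ++ z) ?_
      refine ih u ?_ ?_ ?_
      · rw [List.length_append, show ("JUNE".toList).length = 4 from by decide] at hlen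
        omega
      · intro hb; exact hbJ (hb.trans List.infix_append_right)
      · intro hb; exact hbU (hb.trans List.infix_append_right)
    by_cases hm7 : "JULY".toList <+: l
    · obtain ⟨u, rfl⟩ := hm7
      have hfm : pvFirstMatch pvMonthsC ("JULY".toList ++ u) = some ("JUL".toList, u) := by
        simp [pvMonthsC, pvFirstMatch]
      rw [pvScanGo_succ_some n hfm]
      have hch : pvChain ("JULY".toList ++ u) = "JUL".toList ++ pvChain u := by
        simp only [pvChain]
        rw [show pvMonthsC = [("JANUARY".toList, "JAN".toList), ("FEBRUARY".toList, "FEB".toList), ("MARCH".toList, "MAR".toList), ("APRIL".toList, "APR".toList), ("MAY".toList, "MAY".toList), ("JUNE".toList, "JUN".toList)] ++ ("JULY".toList, "JUL".toList) :: [("AUGUST".toList, "AUG".toList), ("SEPTEMBER".toList, "SEP".toList), ("OCTOBER".toList, "OCT".toList), ("NOVEMBER".toList, "NOV".toList), ("DECEMBER".toList, "DEC".toList)] from by decide]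
        exact pvChain_step [("JANUARY".toList, "JAN".toList), ("FEBRUARY".toList, "FEB".toList), ("MARCH".toList, "MAR".toList), ("APRIL".toList, "APR".toList), ("MAY".toList, "MAY".toList), ("JUNE".toList, "JUN".toList)] [("AUGUST".toList, "AUG".toList), ("SEPTEMBER".toList, "SEP".toList), ("OCTOBER".toList, "OCT".toList), ("NOVEMBER".toList, "NOV".toList), ("DECEMBER".toList, "DEC".toList)] "JULY".toList "JUL".toList u (by decide) (by decide) (by decide)
      rw [hch]
      refine congrArg (fun z => "JUL".toList ++ z) ?_
      refine ih u ?_ ?_ ?_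
      · rw [List.length_append, show ("JULY".toList).length = 4 from by decide] at hlen
        omega
      · intro hb; exact hbJ (hb.trans List.infix_append_right)
      · intro hb; exact hbU (hb.trans List.infix_append_right)
    by_cases hm8 : "AUGUST".toList <+: l
    · obtain ⟨u, rfl⟩ := hm8
      have hfm : pvFirstMatch pvMonthsC ("AUGUST".toList ++ u) = some ("AUG".toList, u) := by
        simp [pvMonthsC, pvFirstMatch]
      rw [pvScanGo_succ_some n hfm]
      have hch : pvChain ("AUGUST".toList ++ u) = "AUG".toList ++ pvChain u := by
        simp only [pvChain]
        rw [show pvMonthsC = [("JANUARY".toList, "JAN".toList), ("FEBRUARY".toList, "FEB".toList), ("MARCH".toList, "MAR".toList), ("APRIL".toList, "APR".toList), ("MAY".toList, "MAY".toList), ("JUNE".toList, "JUN".toList), ("JULY".toList, "JUL".toList)] ++ ("AUGUST".toList, "AUG".toList) :: [("SEPTEMBER".toList, "SEP".toList), ("OCTOBER".toList, "OCT".toList), ("NOVEMBER".toList, "NOV".toList), ("DECEMBER".toList, "DEC".toList)] from by decide]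
        exact pvChain_step [("JANUARY".toList, "JAN".toList), ("FEBRUARY".toList, "FEB".toList), ("MARCH".toList, "MAR".toList), ("APRIL".toList, "APR".toList), ("MAY".toList, "MAY".toList), ("JUNE".toList, "JUN".toList), ("JULY".toList, "JUL".toList)] [("SEPTEMBER".toList, "SEP".toList), ("OCTOBER".toList, "OCT".toList), ("NOVEMBER".toList, "NOV".toList), ("DECEMBER".toList, "DEC".toList)] "AUGUST".toList "AUG".toList u (by decide) (by decide) (by decide)
      rw [hch]
      refine congrArg (fun z => "AUG".toList ++ z) ?_
      refine ih u ?_ ?_ ?_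
      · rw [List.length_append, show ("AUGUST".toList).length = 6 from by decide] at hlen
        omega
      · intro hb; exact hbJ (hb.trans List.infix_append_right)
      · intro hb; exact hbU (hb.trans List.infix_append_right)
    by_cases hm9 : "SEPTEMBER".toList <+: l
    · obtain ⟨u, rfl⟩ := hm9
      have hfm : pvFirstMatch pvMonthsC ("SEPTEMBER".toList ++ u) = some ("SEP".toList, u) := by
        simp [pvMonthsC, pvFirstMatch]
      rw [pvScanGo_succ_some n hfm]
      have hch : pvChain ("SEPTEMBER".toList ++ u) = "SEP".toList ++ pvChain u := by
        simp only [pvChain]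
        rw [show pvMonthsC = [("JANUARY".toList, "JAN".toList), ("FEBRUARY".toList, "FEB".toList), ("MARCH".toList, "MAR".toList), ("APRIL".toList, "APR".toList), ("MAY".toList, "MAY".toList), ("JUNE".toList, "JUN".toList), ("JULY".toList, "JUL".toList), ("AUGUST".toList, "AUG".toList)] ++ ("SEPTEMBER".toList, "SEP".toList) :: [("OCTOBER".toList, "OCT".toList), ("NOVEMBER".toList, "NOV".toList), ("DECEMBER".toList, "DEC".toList)] from by decide]
        exact pvChain_step [("JANUARY".toList, "JAN".toList), ("FEBRUARY".toList, "FEB".toList), ("MARCH".toList, "MAR".toList), ("APRIL".toList, "APR".toList), ("MAY".toList, "MAY".toList), ("JUNE".toList, "JUN".toList), ("JULY".toList, "JUL".toList), ("AUGUST".toList, "AUG".toList)] [("OCTOBER".toList, "OCT".toList), ("NOVEMBER".toList, "NOV".toList), ("DECEMBER".toList, "DEC".toList)] "SEPTEMBER".toList "SEP".toList u (by decide) (by decide) (by decide)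
      rw [hch]
      refine congrArg (fun z => "SEP".toList ++ z) ?_
      refine ih u ?_ ?_ ?_
      · rw [List.length_append, show ("SEPTEMBER".toList).length = 9 from by decide] at hlen
        omega
      · intro hb; exact hbJ (hb.trans List.infix_append_right)
      · intro hb; exact hbU (hb.trans List.infix_append_right)
    by_cases hm10 : "OCTOBER".toList <+: l
    · obtain ⟨u, rfl⟩ := hm10
      have hfm : pvFirstMatch pvMonthsC ("OCTOBER".toList ++ u) = some ("OCT".toList, u) := by
        simp [pvMonthsC, pvFirstMatch]
      rw [pvScanGo_succ_some n hfm]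
      have hch : pvChain ("OCTOBER".toList ++ u) = "OCT".toList ++ pvChain u := by
        simp only [pvChain]
        rw [show pvMonthsC = [("JANUARY".toList, "JAN".toList), ("FEBRUARY".toList, "FEB".toList), ("MARCH".toList, "MAR".toList), ("APRIL".toList, "APR".toList), ("MAY".toList, "MAY".toList), ("JUNE".toList, "JUN".toList), ("JULY".toList, "JUL".toList), ("AUGUST".toList, "AUG".toList), ("SEPTEMBER".toList, "SEP".toList)] ++ ("OCTOBER".toList, "OCT".toList) :: [("NOVEMBER".toList, "NOV".toList), ("DECEMBER".toList, "DEC".toList)] from by decide]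
        exact pvChain_step [("JANUARY".toList, "JAN".toList), ("FEBRUARY".toList, "FEB".toList), ("MARCH".toList, "MAR".toList), ("APRIL".toList, "APR".toList), ("MAY".toList, "MAY".toList), ("JUNE".toList, "JUN".toList), ("JULY".toList, "JUL".toList), ("AUGUST".toList, "AUG".toList), ("SEPTEMBER".toList, "SEP".toList)] [("NOVEMBER".toList, "NOV".toList), ("DECEMBER".toList, "DEC".toList)] "OCTOBER".toList "OCT".toList u (by decide) (by decide) (by decide)
      rw [hch]
      refine congrArg (fun z => "OCT".toList ++ z) ?_
      refine ih u ?_ ?_ ?_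
      · rw [List.length_append, show ("OCTOBER".toList).length = 7 from by decide] at hlen
        omega
      · intro hb; exact hbJ (hb.trans List.infix_append_right)
      · intro hb; exact hbU (hb.trans List.infix_append_right)
    by_cases hm11 : "NOVEMBER".toList <+: l
    · obtain ⟨u, rfl⟩ := hm11
      have hfm : pvFirstMatch pvMonthsC ("NOVEMBER".toList ++ u) = some ("NOV".toList, u) := by
        simp [pvMonthsC, pvFirstMatch]
      rw [pvScanGo_succ_some n hfm]
      have hch : pvChain ("NOVEMBER".toList ++ u) = "NOV".toList ++ pvChain u := by
        simp only [pvChain]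
        rw [show pvMonthsC = [("JANUARY".toList, "JAN".toList), ("FEBRUARY".toList, "FEB".toList), ("MARCH".toList, "MAR".toList), ("APRIL".toList, "APR".toList), ("MAY".toList, "MAY".toList), ("JUNE".toList, "JUN".toList), ("JULY".toList, "JUL".toList), ("AUGUST".toList, "AUG".toList), ("SEPTEMBER".toList, "SEP".toList), ("OCTOBER".toList, "OCT".toList)] ++ ("NOVEMBER".toList, "NOV".toList) :: [("DECEMBER".toList, "DEC".toList)] from by decide]
        exact pvChain_step [("JANUARY".toList, "JAN".toList), ("FEBRUARY".toList, "FEB".toList), ("MARCH".toList, "MAR".toList), ("APRIL".toList, "APR".toList), ("MAY".toList, "MAY".toList), ("JUNE".toList, "JUN".toList), ("JULY".toList, "JUL".toList), ("AUGUST".toList, "AUG".toList), ("SEPTEMBER".toList, "SEP".toList), ("OCTOBER".toList, "OCT".toList)] [("DECEMBER".toList, "DEC".toList)] "NOVEMBER".toList "NOV".toList u (by decide) (by decide) (by decide)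
      rw [hch]
      refine congrArg (fun z => "NOV".toList ++ z) ?_
      refine ih u ?_ ?_ ?_
      · rw [List.length_append, show ("NOVEMBER".toList).length = 8 from by decide] at hlen
        omega
      · intro hb; exact hbJ (hb.trans List.infix_append_right)
      · intro hb; exact hbU (hb.trans List.infix_append_right)
    by_cases hm12 : "DECEMBER".toList <+: l
    · obtain ⟨u, rfl⟩ := hm12
      have hfm : pvFirstMatch pvMonthsC ("DECEMBER".toList ++ u) = some ("DEC".toList, u) := by
        simp [pvMonthsC, pvFirstMatch]
      rw [pvScanGo_succ_some n hfm]
      have hch : pvChain ("DECEMBER".toList ++ u) = "DEC".toList ++ pvChain u := by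
        simp only [pvChain]
        rw [show pvMonthsC = [("JANUARY".toList, "JAN".toList), ("FEBRUARY".toList, "FEB".toList), ("MARCH".toList, "MAR".toList), ("APRIL".toList, "APR".toList), ("MAY".toList, "MAY".toList), ("JUNE".toList, "JUN".toList), ("JULY".toList, "JUL".toList), ("AUGUST".toList, "AUG".toList), ("SEPTEMBER".toList, "SEP".toList), ("OCTOBER".toList, "OCT".toList), ("NOVEMBER".toList, "NOV".toList)] ++ ("DECEMBER".toList, "DEC".toList) :: [] from by decide]
        exact pvChain_step [("JANUARY".toList, "JAN".toList), ("FEBRUARY".toList, "FEB".toList), ("MARCH".toList, "MAR".toList), ("APRIL".toList, "APR".toList), ("MAY".toList, "MAY".toList), ("JUNE".toList, "JUN".toList), ("JULY".toList, "JUL".toList), ("AUGUST".toList, "AUG".toList), ("SEPTEMBER".toList, "SEP".toList), ("OCTOBER".toList, "OCT".toList), ("NOVEMBER".toList, "NOV".toList)] [] "DECEMBER".toList "DEC".toList u (by decide) (by decide) (by decide)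
      rw [hch]
      refine congrArg (fun z => "DEC".toList ++ z) ?_
      refine ih u ?_ ?_ ?_
      · rw [List.length_append, show ("DECEMBER".toList).length = 8 from by decide] at hlen
        omega
      · intro hb; exact hbJ (hb.trans List.infix_append_right)
      · intro hb; exact hbU (hb.trans List.infix_append_right)
    cases l with
    | nil =>
      rw [pvScanGo_succ_nil]
      simp [pvChain, pvMonthsC, pvRep_nil]
    | cons c t =>
      have hall : ∀ p ∈ pvMonthsC, ¬ p.1 <+: c :: t := by
        intro p hp
        simp only [pvMonthsC, List.mem_cons, List.not_mem_nil, or_false] at hp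
        rcases hp with rfl | rfl | rfl | rfl | rfl | rfl | rfl | rfl | rfl | rfl | rfl | rfl
        exacts [hm1, hm2, hm3, hm4, hm5, hm6, hm7, hm8, hm9, hm10, hm11, hm12]
      rw [pvScanGo_succ_cons n c t (pvFirstMatch_none _ _ hall)]
      simp only [pvChain]
      rw [pvFold_cons pvMonthsC c t hall (by decide)]
      refine congrArg (fun z => c :: z) ?_
      refine ih t ?_ ?_ ?_
      · simp only [List.length_cons] at hlen; omega
      · intro hb; exact hbJ (hb.trans (List.suffix_cons c t).isInfix)
      · intro hb; exact hbU (hb.trans (List.suffix_cons c t).isInfix)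

lemma pvChainA : ∀ (ms : List (String × String)) (r : String), (∀ p ∈ ms, p.1.toList ≠ []) →
    (ms.foldl (fun r p => PySem.Str.replace r p.1 p.2) r).toList
      = (ms.map (fun p => (p.1.toList, p.2.toList))).foldl (fun s p => pvRep p.1 p.2 s) r.toList := by
  intro ms
  induction ms with
  | nil => intro r _; simp
  | cons hd rest ih =>
    intro r h
    simp only [List.foldl_cons, List.map_cons]
    rw [ih _ (fun p hp => h p (by simp [hp]))]
    congr 1
    rw [PySem.Str.toList_replace]
    cases h1 : hd.1.toList with
    | nil => exact absurd h1 (h hd (by simp))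
    | cons o ot => exact pvReplaceEq o ot hd.2.toList r.toList

lemma pvNorm_eq (s : String) :
    (PySem.Str.join " " (PySem.Str.split₀ (PySem.Str.strip (PySem.Str.upper s)))).toList = pvNorm s := by
  simp [pvNorm, pysem]

lemma pvScanGo_skip : ∀ (w x : List Char) (n : Nat), w.length ≤ n →
    (∀ p, p < w.length → ∀ pr ∈ pvMonthsC, ¬ pr.1 <+: w.drop p ∧ ¬ w.drop p <+: pr.1) →
    pvScanGo n (w ++ x) = w ++ pvScanGo (n - w.length) x := by
  intro w
  induction w with
  | nil => intro x n _ _; simp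
  | cons c w' ih =>
    intro x n hn h
    cases n with
    | zero => simp at hn
    | succ m =>
      have hfm : pvFirstMatch pvMonthsC ((c :: w') ++ x) = none := by
        refine pvFirstMatch_none _ _ ?_
        intro pr hpr
        exact pvNotPreAppend x (h 0 (by simp) pr hpr).1 (h 0 (by simp) pr hpr).2
      rw [List.cons_append] at hfm ⊢
      rw [pvScanGo_succ_cons m _ _ hfm]
      rw [ih x m (by simpa using hn) (fun p hp pr hpr => by simpa using h (p+1) (by simp; omega) pr hpr)]
      simp only [List.length_cons, List.cons_append]
      rw [show m + 1 - (w'.length + 1) = m - w'.length from by omega]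

lemma pvRep_novCasc (c1 c2 : Char) (hc1 : c1 ≠ 'N') (hc2 : c2 ≠ 'N') (y : List Char) :
    pvRep "NOVEMBER".toList "NOV".toList (c1 :: c2 :: ("NOVEMBER".toList ++ y))
      = c1 :: c2 :: ("NOV".toList ++ pvRep "NOVEMBER".toList "NOV".toList y) := by
  have hshape : "NOVEMBER".toList = 'N' :: "OVEMBER".toList := by decide
  rw [pvRep_cons_of_not _ (by rw [hshape]; intro hcon; rw [List.cons_prefix_cons] at hcon; exact hc1 hcon.1.symm)]
  rw [pvRep_cons_of_not _ (by rw [hshape]; intro hcon; rw [List.cons_prefix_cons] at hcon; exact hc2 hcon.1.symm)]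
  rw [pvRep_left "NOVEMBER".toList (by decide) _ _]

lemma pvChain_stepCasc (P Q : List (List Char × List Char)) (m : List Char) (c1 c2 : Char) (v : List Char)
    (hm : m ≠ []) (hc1 : c1 ≠ 'N') (hc2 : c2 ≠ 'N')
    (h1 : ∀ p ∈ P, ∀ q, q < (m ++ "OVEMBER".toList).length →
      ¬ p.1 <+: (m ++ "OVEMBER".toList).drop q ∧ ¬ (m ++ "OVEMBER".toList).drop q <+: p.1)
    (hmo : ∀ q, q < 7 → ¬ m <+: "OVEMBER".toList.drop q ∧ ¬ "OVEMBER".toList.drop q <+: m)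
    (h2 : ∀ p ∈ Q, ∀ q, q < 10 →
      ¬ p.1 <+: ([c1, c2, 'N'] ++ "OVEMBER".toList).drop q ∧ ¬ ([c1, c2, 'N'] ++ "OVEMBER".toList).drop q <+: p.1)
    (h3 : ∀ q, q < 5 → ¬ "DECEMBER".toList <+: [c1, c2, 'N', 'O', 'V'].drop q ∧
      ¬ [c1, c2, 'N', 'O', 'V'].drop q <+: "DECEMBER".toList) :
    (P ++ (m, [c1, c2, 'N']) :: Q ++ [("NOVEMBER".toList, "NOV".toList), ("DECEMBER".toList, "DEC".toList)]).foldl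
        (fun s p => pvRep p.1 p.2 s) (m ++ ("OVEMBER".toList ++ v))
      = [c1, c2, 'N', 'O', 'V'] ++ (P ++ (m, [c1, c2, 'N']) :: Q ++ [("NOVEMBER".toList, "NOV".toList), ("DECEMBER".toList, "DEC".toList)]).foldl
        (fun s p => pvRep p.1 p.2 s) v := by
  have hshape : "NOVEMBER".toList = 'N' :: "OVEMBER".toList := by decide
  have e1 : ∀ x, (P ++ (m, [c1, c2, 'N']) :: Q ++ [("NOVEMBER".toList, "NOV".toList), ("DECEMBER".toList, "DEC".toList)]).foldl
      (fun s p => pvRep p.1 p.2 s) x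
      = pvRep "DECEMBER".toList "DEC".toList (pvRep "NOVEMBER".toList "NOV".toList
          (Q.foldl (fun s p => pvRep p.1 p.2 s) (pvRep m [c1, c2, 'N'] (P.foldl (fun s p => pvRep p.1 p.2 s) x)))) := by
    intro x; simp [List.foldl_append]
  rw [e1, e1]
  rw [← List.append_assoc, pvFold_skip P (m ++ "OVEMBER".toList) v h1, List.append_assoc,
      pvRep_left m hm _ _, pvRep_skip m [c1, c2, 'N'] "OVEMBER".toList _ hmo]
  rw [show [c1, c2, 'N'] ++ ("OVEMBER".toList ++ pvRep m [c1, c2, 'N'] (P.foldl (fun s p => pvRep p.1 p.2 s) v))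
      = ([c1, c2, 'N'] ++ "OVEMBER".toList) ++ pvRep m [c1, c2, 'N'] (P.foldl (fun s p => pvRep p.1 p.2 s) v) from by
    simp [List.append_assoc]]
  rw [pvFold_skip Q ([c1, c2, 'N'] ++ "OVEMBER".toList) _ (by simpa using h2)]
  rw [show ([c1, c2, 'N'] ++ "OVEMBER".toList) ++ Q.foldl (fun s p => pvRep p.1 p.2 s) (pvRep m [c1, c2, 'N'] (P.foldl (fun s p => pvRep p.1 p.2 s) v))
      = c1 :: c2 :: ("NOVEMBER".toList ++ Q.foldl (fun s p => pvRep p.1 p.2 s) (pvRep m [c1, c2, 'N'] (P.foldl (fun s p => pvRep p.1 p.2 s) v))) from by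
    simp [hshape]]
  rw [pvRep_novCasc c1 c2 hc1 hc2]
  rw [show c1 :: c2 :: ("NOV".toList ++ pvRep "NOVEMBER".toList "NOV".toList (Q.foldl (fun s p => pvRep p.1 p.2 s) (pvRep m [c1, c2, 'N'] (P.foldl (fun s p => pvRep p.1 p.2 s) v))))
      = [c1, c2, 'N', 'O', 'V'] ++ pvRep "NOVEMBER".toList "NOV".toList (Q.foldl (fun s p => pvRep p.1 p.2 s) (pvRep m [c1, c2, 'N'] (P.foldl (fun s p => pvRep p.1 p.2 s) v))) from by
    simp [show ("NOV".toList : List Char) = ['N', 'O', 'V'] from by decide]]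
  rw [pvRep_skip "DECEMBER".toList "DEC".toList [c1, c2, 'N', 'O', 'V'] _ h3]

lemma pvBadDescend {pat mk u : List Char} (h0 : ¬ pat <+: mk ++ u)
    (hd : ∀ j, 1 ≤ j → j < mk.length → ¬ pat <+: mk.drop j ∧ ¬ mk.drop j <+: pat)
    (hb : ∃ j, pat <+: (mk ++ u).drop j) : ∃ j, pat <+: u.drop j := by
  obtain ⟨j, hj⟩ := hb
  by_cases hjm : j < mk.length
  · rcases Nat.eq_zero_or_pos j with rfl | hj1
    · exact absurd (by simpa using hj) h0
    · rw [List.drop_append_of_le_length (le_of_lt hjm)] at hj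
      exact absurd hj (pvNotPreAppend u (hd j hj1 hjm).1 (hd j hj1 hjm).2)
  · refine ⟨j - mk.length, ?_⟩
    rw [show j = mk.length + (j - mk.length) from by omega, List.drop_length_add_append] at hj
    exact hj

lemma pvBadDescendCons {pat : List Char} {c : Char} {t : List Char} (h0 : ¬ pat <+: c :: t)
    (hb : ∃ j, pat <+: (c :: t).drop j) : ∃ j, pat <+: t.drop j := by
  obtain ⟨j, hj⟩ := hb
  cases j with
  | zero => exact absurd (by simpa using hj) h0
  | succ j => exact ⟨j, by simpa using hj⟩

lemma pvLen : ∀ (n : Nat) (l : List Char), l.length ≤ n →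
    (pvChain l).length ≤ (pvScanGo n l).length ∧
    ((∃ j, "JANUARYOVEMBER".toList <+: l.drop j) ∨ (∃ j, "JUNEOVEMBER".toList <+: l.drop j) →
      (pvChain l).length < (pvScanGo n l).length) := by
  intro n
  induction n using Nat.strong_induction_on with
  | _ n ih =>
  intro l hlen
  cases n with
  | zero =>
    rw [List.eq_nil_iff_length_eq_zero.mpr (Nat.le_zero.mp hlen)]
    refine ⟨by simp [pvChain, pvMonthsC, pvRep_nil, pvScanGo], ?_⟩
    rintro (⟨j, hj⟩ | ⟨j, hj⟩) <;> simp only [List.drop_nil] at hj <;>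
      exact absurd (List.prefix_nil.mp hj) (by decide)
  | succ m =>
    by_cases hm1 : "JANUARY".toList <+: l
    · obtain ⟨u, rfl⟩ := hm1
      by_cases hov : "OVEMBER".toList <+: u
      · obtain ⟨v, rfl⟩ := hov
        have hfm : pvFirstMatch pvMonthsC ("JANUARY".toList ++ ("OVEMBER".toList ++ v)) = some ("JAN".toList, "OVEMBER".toList ++ v) := by
          simp [pvMonthsC, pvFirstMatch]
        have hlen' : 7 + (7 + v.length) ≤ m + 1 := by
          simp only [List.length_append, show ("JANUARY".toList).length = 7 from by decide,
            show ("OVEMBER".toList).length = 7 from by decide] at hlen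
          omega
        have hch : pvChain ("JANUARY".toList ++ ("OVEMBER".toList ++ v)) = ['J', 'A', 'N', 'O', 'V'] ++ pvChain v := by
          simp only [pvChain]
          rw [show pvMonthsC = [] ++ ("JANUARY".toList, (['J', 'A', 'N'] : List Char)) :: [("FEBRUARY".toList, "FEB".toList), ("MARCH".toList, "MAR".toList), ("APRIL".toList, "APR".toList), ("MAY".toList, "MAY".toList), ("JUNE".toList, "JUN".toList), ("JULY".toList, "JUL".toList), ("AUGUST".toList, "AUG".toList), ("SEPTEMBER".toList, "SEP".toList), ("OCTOBER".toList, "OCT".toList)] ++ [("NOVEMBER".toList, "NOV".toList), ("DECEMBER".toList, "DEC".toList)] from by decide]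
          exact pvChain_stepCasc [] [("FEBRUARY".toList, "FEB".toList), ("MARCH".toList, "MAR".toList), ("APRIL".toList, "APR".toList), ("MAY".toList, "MAY".toList), ("JUNE".toList, "JUN".toList), ("JULY".toList, "JUL".toList), ("AUGUST".toList, "AUG".toList), ("SEPTEMBER".toList, "SEP".toList), ("OCTOBER".toList, "OCT".toList)] "JANUARY".toList 'J' 'A' v (by decide) (by decide) (by decide) (by decide) (by decide) (by decide) (by decide)
        rw [pvScanGo_succ_some m hfm, hch]
        rw [pvScanGo_skip "OVEMBER".toList v m (by rw [show ("OVEMBER".toList).length = 7 from by decide]; omega) (by decide)]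
        rw [show ("OVEMBER".toList).length = 7 from by decide]
        have IH := ih (m - 7) (by omega) v (by omega)
        have h1 := IH.1
        refine ⟨?_, fun _ => ?_⟩ <;>
        · simp only [List.length_append, List.length_cons, List.length_nil,
            show ("OVEMBER".toList).length = 7 from by decide, show ("JAN".toList).length = 3 from by decide]
          omega
      · have hfm : pvFirstMatch pvMonthsC ("JANUARY".toList ++ u) = some ("JAN".toList, u) := by
          simp [pvMonthsC, pvFirstMatch]
        have hu : ¬ "OVEMBER".toList <+: u := hov
        have hch : pvChain ("JANUARY".toList ++ u) = "JAN".toList ++ pvChain u := by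
          simp only [pvChain]
          rw [show pvMonthsC = [] ++ ("JANUARY".toList, (['J', 'A', 'N'] : List Char)) :: [("FEBRUARY".toList, "FEB".toList), ("MARCH".toList, "MAR".toList), ("APRIL".toList, "APR".toList), ("MAY".toList, "MAY".toList), ("JUNE".toList, "JUN".toList), ("JULY".toList, "JUL".toList), ("AUGUST".toList, "AUG".toList), ("SEPTEMBER".toList, "SEP".toList), ("OCTOBER".toList, "OCT".toList)] ++ [("NOVEMBER".toList, "NOV".toList), ("DECEMBER".toList, "DEC".toList)] from by decide]
          exact pvChain_stepN [] [("FEBRUARY".toList, "FEB".toList), ("MARCH".toList, "MAR".toList), ("APRIL".toList, "APR".toList), ("MAY".toList, "MAY".toList), ("JUNE".toList, "JUN".toList), ("JULY".toList, "JUL".toList), ("AUGUST".toList, "AUG".toList), ("SEPTEMBER".toList, "SEP".toList), ("OCTOBER".toList, "OCT".toList)] "JANUARY".toList 'J' 'A' u (by decide) (by decide) (by decide) (by decide) (by decide) (by decide) (by decide) hu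
        rw [pvScanGo_succ_some m hfm, hch]
        have hul : u.length ≤ m := by
          rw [List.length_append, show ("JANUARY".toList).length = 7 from by decide] at hlen; omega
        have IH := ih m (Nat.lt_succ_self m) u hul
        refine ⟨by have := IH.1; simp only [List.length_append]; omega, ?_⟩
        intro hb
        have hbu : (∃ j, "JANUARYOVEMBER".toList <+: u.drop j) ∨ (∃ j, "JUNEOVEMBER".toList <+: u.drop j) := by
          rcases hb with hb | hb
          · refine Or.inl (pvBadDescend ?_ (by decide) hb)
            rw [show "JANUARYOVEMBER".toList = "JANUARY".toList ++ "OVEMBER".toList from by decide]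
            intro hp
            exact hov ((List.prefix_append_right_inj _).mp hp)
          · exact Or.inr (pvBadDescend (pvNotPreAppend u (by decide) (by decide)) (by decide) hb)
        have := IH.2 hbu
        simp only [List.length_append]; omega
    by_cases hm2 : "FEBRUARY".toList <+: l
    · obtain ⟨u, rfl⟩ := hm2
      have hfm : pvFirstMatch pvMonthsC ("FEBRUARY".toList ++ u) = some ("FEB".toList, u) := by
        simp [pvMonthsC, pvFirstMatch]
      have hch : pvChain ("FEBRUARY".toList ++ u) = "FEB".toList ++ pvChain u := by
        simp only [pvChain]
        rw [show pvMonthsC = [("JANUARY".toList, "JAN".toList)] ++ ("FEBRUARY".toList, "FEB".toList) :: [("MARCH".toList, "MAR".toList), ("APRIL".toList, "APR".toList), ("MAY".toList, "MAY".toList), ("JUNE".toList, "JUN".toList), ("JULY".toList, "JUL".toList), ("AUGUST".toList, "AUG".toList), ("SEPTEMBER".toList, "SEP".toList), ("OCTOBER".toList, "OCT".toList), ("NOVEMBER".toList, "NOV".toList), ("DECEMBER".toList, "DEC".toList)] from by decide]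
        exact pvChain_step [("JANUARY".toList, "JAN".toList)] [("MARCH".toList, "MAR".toList), ("APRIL".toList, "APR".toList), ("MAY".toList, "MAY".toList), ("JUNE".toList, "JUN".toList), ("JULY".toList, "JUL".toList), ("AUGUST".toList, "AUG".toList), ("SEPTEMBER".toList, "SEP".toList), ("OCTOBER".toList, "OCT".toList), ("NOVEMBER".toList, "NOV".toList), ("DECEMBER".toList, "DEC".toList)] "FEBRUARY".toList "FEB".toList u (by decide) (by decide) (by decide)
      rw [pvScanGo_succ_some m hfm, hch]
      have hul : u.length ≤ m := by
        rw [List.length_append, show ("FEBRUARY".toList).length = 8 from by decide] at hlen; omega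
      have IH := ih m (Nat.lt_succ_self m) u hul
      refine ⟨by have := IH.1; simp only [List.length_append]; omega, ?_⟩
      intro hb
      have hbu : (∃ j, "JANUARYOVEMBER".toList <+: u.drop j) ∨ (∃ j, "JUNEOVEMBER".toList <+: u.drop j) := by
        rcases hb with hb | hb
        · exact Or.inl (pvBadDescend (pvNotPreAppend u (by decide) (by decide)) (by decide) hb)
        · exact Or.inr (pvBadDescend (pvNotPreAppend u (by decide) (by decide)) (by decide) hb)
      have := IH.2 hbu
      simp only [List.length_append]; omega
    by_cases hm3 : "MARCH".toList <+: l
    · obtain ⟨u, rfl⟩ := hm3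
      have hfm : pvFirstMatch pvMonthsC ("MARCH".toList ++ u) = some ("MAR".toList, u) := by
        simp [pvMonthsC, pvFirstMatch]
      have hch : pvChain ("MARCH".toList ++ u) = "MAR".toList ++ pvChain u := by
        simp only [pvChain]
        rw [show pvMonthsC = [("JANUARY".toList, "JAN".toList), ("FEBRUARY".toList, "FEB".toList)] ++ ("MARCH".toList, "MAR".toList) :: [("APRIL".toList, "APR".toList), ("MAY".toList, "MAY".toList), ("JUNE".toList, "JUN".toList), ("JULY".toList, "JUL".toList), ("AUGUST".toList, "AUG".toList), ("SEPTEMBER".toList, "SEP".toList), ("OCTOBER".toList, "OCT".toList), ("NOVEMBER".toList, "NOV".toList), ("DECEMBER".toList, "DEC".toList)] from by decide]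
        exact pvChain_step [("JANUARY".toList, "JAN".toList), ("FEBRUARY".toList, "FEB".toList)] [("APRIL".toList, "APR".toList), ("MAY".toList, "MAY".toList), ("JUNE".toList, "JUN".toList), ("JULY".toList, "JUL".toList), ("AUGUST".toList, "AUG".toList), ("SEPTEMBER".toList, "SEP".toList), ("OCTOBER".toList, "OCT".toList), ("NOVEMBER".toList, "NOV".toList), ("DECEMBER".toList, "DEC".toList)] "MARCH".toList "MAR".toList u (by decide) (by decide) (by decide)
      rw [pvScanGo_succ_some m hfm, hch]
      have hul : u.length ≤ m := by
        rw [List.length_append, show ("MARCH".toList).length = 5 from by decide] at hlen; omega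
      have IH := ih m (Nat.lt_succ_self m) u hul
      refine ⟨by have := IH.1; simp only [List.length_append]; omega, ?_⟩
      intro hb
      have hbu : (∃ j, "JANUARYOVEMBER".toList <+: u.drop j) ∨ (∃ j, "JUNEOVEMBER".toList <+: u.drop j) := by
        rcases hb with hb | hb
        · exact Or.inl (pvBadDescend (pvNotPreAppend u (by decide) (by decide)) (by decide) hb)
        · exact Or.inr (pvBadDescend (pvNotPreAppend u (by decide) (by decide)) (by decide) hb)
      have := IH.2 hbu
      simp only [List.length_append]; omega
    by_cases hm4 : "APRIL".toList <+: l
    · obtain ⟨u, rfl⟩ := hm4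
      have hfm : pvFirstMatch pvMonthsC ("APRIL".toList ++ u) = some ("APR".toList, u) := by
        simp [pvMonthsC, pvFirstMatch]
      have hch : pvChain ("APRIL".toList ++ u) = "APR".toList ++ pvChain u := by
        simp only [pvChain]
        rw [show pvMonthsC = [("JANUARY".toList, "JAN".toList), ("FEBRUARY".toList, "FEB".toList), ("MARCH".toList, "MAR".toList)] ++ ("APRIL".toList, "APR".toList) :: [("MAY".toList, "MAY".toList), ("JUNE".toList, "JUN".toList), ("JULY".toList, "JUL".toList), ("AUGUST".toList, "AUG".toList), ("SEPTEMBER".toList, "SEP".toList), ("OCTOBER".toList, "OCT".toList), ("NOVEMBER".toList, "NOV".toList), ("DECEMBER".toList, "DEC".toList)] from by decide]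
        exact pvChain_step [("JANUARY".toList, "JAN".toList), ("FEBRUARY".toList, "FEB".toList), ("MARCH".toList, "MAR".toList)] [("MAY".toList, "MAY".toList), ("JUNE".toList, "JUN".toList), ("JULY".toList, "JUL".toList), ("AUGUST".toList, "AUG".toList), ("SEPTEMBER".toList, "SEP".toList), ("OCTOBER".toList, "OCT".toList), ("NOVEMBER".toList, "NOV".toList), ("DECEMBER".toList, "DEC".toList)] "APRIL".toList "APR".toList u (by decide) (by decide) (by decide)
      rw [pvScanGo_succ_some m hfm, hch]
      have hul : u.length ≤ m := by
        rw [List.length_append, show ("APRIL".toList).length = 5 from by decide] at hlen; omega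
      have IH := ih m (Nat.lt_succ_self m) u hul
      refine ⟨by have := IH.1; simp only [List.length_append]; omega, ?_⟩
      intro hb
      have hbu : (∃ j, "JANUARYOVEMBER".toList <+: u.drop j) ∨ (∃ j, "JUNEOVEMBER".toList <+: u.drop j) := by
        rcases hb with hb | hb
        · exact Or.inl (pvBadDescend (pvNotPreAppend u (by decide) (by decide)) (by decide) hb)
        · exact Or.inr (pvBadDescend (pvNotPreAppend u (by decide) (by decide)) (by decide) hb)
      have := IH.2 hbu
      simp only [List.length_append]; omega
    by_cases hm5 : "MAY".toList <+: l
    · obtain ⟨u, rfl⟩ := hm5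
      have hfm : pvFirstMatch pvMonthsC ("MAY".toList ++ u) = some ("MAY".toList, u) := by
        simp [pvMonthsC, pvFirstMatch]
      have hch : pvChain ("MAY".toList ++ u) = "MAY".toList ++ pvChain u := by
        simp only [pvChain]
        rw [show pvMonthsC = [("JANUARY".toList, "JAN".toList), ("FEBRUARY".toList, "FEB".toList), ("MARCH".toList, "MAR".toList), ("APRIL".toList, "APR".toList)] ++ ("MAY".toList, "MAY".toList) :: [("JUNE".toList, "JUN".toList), ("JULY".toList, "JUL".toList), ("AUGUST".toList, "AUG".toList), ("SEPTEMBER".toList, "SEP".toList), ("OCTOBER".toList, "OCT".toList), ("NOVEMBER".toList, "NOV".toList), ("DECEMBER".toList, "DEC".toList)] from by decide]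
        exact pvChain_step [("JANUARY".toList, "JAN".toList), ("FEBRUARY".toList, "FEB".toList), ("MARCH".toList, "MAR".toList), ("APRIL".toList, "APR".toList)] [("JUNE".toList, "JUN".toList), ("JULY".toList, "JUL".toList), ("AUGUST".toList, "AUG".toList), ("SEPTEMBER".toList, "SEP".toList), ("OCTOBER".toList, "OCT".toList), ("NOVEMBER".toList, "NOV".toList), ("DECEMBER".toList, "DEC".toList)] "MAY".toList "MAY".toList u (by decide) (by decide) (by decide)
      rw [pvScanGo_succ_some m hfm, hch]
      have hul : u.length ≤ m := by
        rw [List.length_append, show ("MAY".toList).length = 3 from by decide] at hlen; omega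
      have IH := ih m (Nat.lt_succ_self m) u hul
      refine ⟨by have := IH.1; simp only [List.length_append]; omega, ?_⟩
      intro hb
      have hbu : (∃ j, "JANUARYOVEMBER".toList <+: u.drop j) ∨ (∃ j, "JUNEOVEMBER".toList <+: u.drop j) := by
        rcases hb with hb | hb
        · exact Or.inl (pvBadDescend (pvNotPreAppend u (by decide) (by decide)) (by decide) hb)
        · exact Or.inr (pvBadDescend (pvNotPreAppend u (by decide) (by decide)) (by decide) hb)
      have := IH.2 hbu
      simp only [List.length_append]; omega
    by_cases hm6 : "JUNE".toList <+: l
    · obtain ⟨u, rfl⟩ := hm6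
      by_cases hov : "OVEMBER".toList <+: u
      · obtain ⟨v, rfl⟩ := hov
        have hfm : pvFirstMatch pvMonthsC ("JUNE".toList ++ ("OVEMBER".toList ++ v)) = some ("JUN".toList, "OVEMBER".toList ++ v) := by
          simp [pvMonthsC, pvFirstMatch]
        have hlen' : 4 + (7 + v.length) ≤ m + 1 := by
          simp only [List.length_append, show ("JUNE".toList).length = 4 from by decide,
            show ("OVEMBER".toList).length = 7 from by decide] at hlen
          omega
        have hch : pvChain ("JUNE".toList ++ ("OVEMBER".toList ++ v)) = ['J', 'U', 'N', 'O', 'V'] ++ pvChain v := by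
          simp only [pvChain]
          rw [show pvMonthsC = [("JANUARY".toList, "JAN".toList), ("FEBRUARY".toList, "FEB".toList), ("MARCH".toList, "MAR".toList), ("APRIL".toList, "APR".toList), ("MAY".toList, "MAY".toList)] ++ ("JUNE".toList, (['J', 'U', 'N'] : List Char)) :: [("JULY".toList, "JUL".toList), ("AUGUST".toList, "AUG".toList), ("SEPTEMBER".toList, "SEP".toList), ("OCTOBER".toList, "OCT".toList)] ++ [("NOVEMBER".toList, "NOV".toList), ("DECEMBER".toList, "DEC".toList)] from by decide]
          exact pvChain_stepCasc [("JANUARY".toList, "JAN".toList), ("FEBRUARY".toList, "FEB".toList), ("MARCH".toList, "MAR".toList), ("APRIL".toList, "APR".toList), ("MAY".toList, "MAY".toList)] [("JULY".toList, "JUL".toList), ("AUGUST".toList, "AUG".toList), ("SEPTEMBER".toList, "SEP".toList), ("OCTOBER".toList, "OCT".toList)] "JUNE".toList 'J' 'U' v (by decide) (by decide) (by decide) (by decide) (by decide) (by decide) (by decide)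
        rw [pvScanGo_succ_some m hfm, hch]
        rw [pvScanGo_skip "OVEMBER".toList v m (by rw [show ("OVEMBER".toList).length = 7 from by decide]; omega) (by decide)]
        rw [show ("OVEMBER".toList).length = 7 from by decide]
        have IH := ih (m - 7) (by omega) v (by omega)
        have h1 := IH.1
        refine ⟨?_, fun _ => ?_⟩ <;>
        · simp only [List.length_append, List.length_cons, List.length_nil,
            show ("OVEMBER".toList).length = 7 from by decide, show ("JUN".toList).length = 3 from by decide]
          omega
      · have hfm : pvFirstMatch pvMonthsC ("JUNE".toList ++ u) = some ("JUN".toList, u) := by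
          simp [pvMonthsC, pvFirstMatch]
        have hu : ¬ "OVEMBER".toList <+: u := hov
        have hch : pvChain ("JUNE".toList ++ u) = "JUN".toList ++ pvChain u := by
          simp only [pvChain]
          rw [show pvMonthsC = [("JANUARY".toList, "JAN".toList), ("FEBRUARY".toList, "FEB".toList), ("MARCH".toList, "MAR".toList), ("APRIL".toList, "APR".toList), ("MAY".toList, "MAY".toList)] ++ ("JUNE".toList, (['J', 'U', 'N'] : List Char)) :: [("JULY".toList, "JUL".toList), ("AUGUST".toList, "AUG".toList), ("SEPTEMBER".toList, "SEP".toList), ("OCTOBER".toList, "OCT".toList)] ++ [("NOVEMBER".toList, "NOV".toList), ("DECEMBER".toList, "DEC".toList)] from by decide]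
          exact pvChain_stepN [("JANUARY".toList, "JAN".toList), ("FEBRUARY".toList, "FEB".toList), ("MARCH".toList, "MAR".toList), ("APRIL".toList, "APR".toList), ("MAY".toList, "MAY".toList)] [("JULY".toList, "JUL".toList), ("AUGUST".toList, "AUG".toList), ("SEPTEMBER".toList, "SEP".toList), ("OCTOBER".toList, "OCT".toList)] "JUNE".toList 'J' 'U' u (by decide) (by decide) (by decide) (by decide) (by decide) (by decide) (by decide) hu
        rw [pvScanGo_succ_some m hfm, hch]
        have hul : u.length ≤ m := by
          rw [List.length_append, show ("JUNE".toList).length = 4 from by decide] at hlen; omega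
        have IH := ih m (Nat.lt_succ_self m) u hul
        refine ⟨by have := IH.1; simp only [List.length_append]; omega, ?_⟩
        intro hb
        have hbu : (∃ j, "JANUARYOVEMBER".toList <+: u.drop j) ∨ (∃ j, "JUNEOVEMBER".toList <+: u.drop j) := by
          rcases hb with hb | hb
          · exact Or.inl (pvBadDescend (pvNotPreAppend u (by decide) (by decide)) (by decide) hb)
          · refine Or.inr (pvBadDescend ?_ (by decide) hb)
            rw [show "JUNEOVEMBER".toList = "JUNE".toList ++ "OVEMBER".toList from by decide]
            intro hp
            exact hov ((List.prefix_append_right_inj _).mp hp)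
        have := IH.2 hbu
        simp only [List.length_append]; omega
    by_cases hm7 : "JULY".toList <+: l
    · obtain ⟨u, rfl⟩ := hm7
      have hfm : pvFirstMatch pvMonthsC ("JULY".toList ++ u) = some ("JUL".toList, u) := by
        simp [pvMonthsC, pvFirstMatch]
      have hch : pvChain ("JULY".toList ++ u) = "JUL".toList ++ pvChain u := by
        simp only [pvChain]
        rw [show pvMonthsC = [("JANUARY".toList, "JAN".toList), ("FEBRUARY".toList, "FEB".toList), ("MARCH".toList, "MAR".toList), ("APRIL".toList, "APR".toList), ("MAY".toList, "MAY".toList), ("JUNE".toList, "JUN".toList)] ++ ("JULY".toList, "JUL".toList) :: [("AUGUST".toList, "AUG".toList), ("SEPTEMBER".toList, "SEP".toList), ("OCTOBER".toList, "OCT".toList), ("NOVEMBER".toList, "NOV".toList), ("DECEMBER".toList, "DEC".toList)] from by decide]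
        exact pvChain_step [("JANUARY".toList, "JAN".toList), ("FEBRUARY".toList, "FEB".toList), ("MARCH".toList, "MAR".toList), ("APRIL".toList, "APR".toList), ("MAY".toList, "MAY".toList), ("JUNE".toList, "JUN".toList)] [("AUGUST".toList, "AUG".toList), ("SEPTEMBER".toList, "SEP".toList), ("OCTOBER".toList, "OCT".toList), ("NOVEMBER".toList, "NOV".toList), ("DECEMBER".toList, "DEC".toList)] "JULY".toList "JUL".toList u (by decide) (by decide) (by decide)
      rw [pvScanGo_succ_some m hfm, hch]
      have hul : u.length ≤ m := by
        rw [List.length_append, show ("JULY".toList).length = 4 from by decide] at hlen; omega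
      have IH := ih m (Nat.lt_succ_self m) u hul
      refine ⟨by have := IH.1; simp only [List.length_append]; omega, ?_⟩
      intro hb
      have hbu : (∃ j, "JANUARYOVEMBER".toList <+: u.drop j) ∨ (∃ j, "JUNEOVEMBER".toList <+: u.drop j) := by
        rcases hb with hb | hb
        · exact Or.inl (pvBadDescend (pvNotPreAppend u (by decide) (by decide)) (by decide) hb)
        · exact Or.inr (pvBadDescend (pvNotPreAppend u (by decide) (by decide)) (by decide) hb)
      have := IH.2 hbu
      simp only [List.length_append]; omega
    by_cases hm8 : "AUGUST".toList <+: l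
    · obtain ⟨u, rfl⟩ := hm8
      have hfm : pvFirstMatch pvMonthsC ("AUGUST".toList ++ u) = some ("AUG".toList, u) := by
        simp [pvMonthsC, pvFirstMatch]
      have hch : pvChain ("AUGUST".toList ++ u) = "AUG".toList ++ pvChain u := by
        simp only [pvChain]
        rw [show pvMonthsC = [("JANUARY".toList, "JAN".toList), ("FEBRUARY".toList, "FEB".toList), ("MARCH".toList, "MAR".toList), ("APRIL".toList, "APR".toList), ("MAY".toList, "MAY".toList), ("JUNE".toList, "JUN".toList), ("JULY".toList, "JUL".toList)] ++ ("AUGUST".toList, "AUG".toList) :: [("SEPTEMBER".toList, "SEP".toList), ("OCTOBER".toList, "OCT".toList), ("NOVEMBER".toList, "NOV".toList), ("DECEMBER".toList, "DEC".toList)] from by decide]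
        exact pvChain_step [("JANUARY".toList, "JAN".toList), ("FEBRUARY".toList, "FEB".toList), ("MARCH".toList, "MAR".toList), ("APRIL".toList, "APR".toList), ("MAY".toList, "MAY".toList), ("JUNE".toList, "JUN".toList), ("JULY".toList, "JUL".toList)] [("SEPTEMBER".toList, "SEP".toList), ("OCTOBER".toList, "OCT".toList), ("NOVEMBER".toList, "NOV".toList), ("DECEMBER".toList, "DEC".toList)] "AUGUST".toList "AUG".toList u (by decide) (by decide) (by decide)
      rw [pvScanGo_succ_some m hfm, hch]
      have hul : u.length ≤ m := by
        rw [List.length_append, show ("AUGUST".toList).length = 6 from by decide] at hlen; omega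
      have IH := ih m (Nat.lt_succ_self m) u hul
      refine ⟨by have := IH.1; simp only [List.length_append]; omega, ?_⟩
      intro hb
      have hbu : (∃ j, "JANUARYOVEMBER".toList <+: u.drop j) ∨ (∃ j, "JUNEOVEMBER".toList <+: u.drop j) := by
        rcases hb with hb | hb
        · exact Or.inl (pvBadDescend (pvNotPreAppend u (by decide) (by decide)) (by decide) hb)
        · exact Or.inr (pvBadDescend (pvNotPreAppend u (by decide) (by decide)) (by decide) hb)
      have := IH.2 hbu
      simp only [List.length_append]; omega
    by_cases hm9 : "SEPTEMBER".toList <+: l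
    · obtain ⟨u, rfl⟩ := hm9
      have hfm : pvFirstMatch pvMonthsC ("SEPTEMBER".toList ++ u) = some ("SEP".toList, u) := by
        simp [pvMonthsC, pvFirstMatch]
      have hch : pvChain ("SEPTEMBER".toList ++ u) = "SEP".toList ++ pvChain u := by
        simp only [pvChain]
        rw [show pvMonthsC = [("JANUARY".toList, "JAN".toList), ("FEBRUARY".toList, "FEB".toList), ("MARCH".toList, "MAR".toList), ("APRIL".toList, "APR".toList), ("MAY".toList, "MAY".toList), ("JUNE".toList, "JUN".toList), ("JULY".toList, "JUL".toList), ("AUGUST".toList, "AUG".toList)] ++ ("SEPTEMBER".toList, "SEP".toList) :: [("OCTOBER".toList, "OCT".toList), ("NOVEMBER".toList, "NOV".toList), ("DECEMBER".toList, "DEC".toList)] from by decide]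
        exact pvChain_step [("JANUARY".toList, "JAN".toList), ("FEBRUARY".toList, "FEB".toList), ("MARCH".toList, "MAR".toList), ("APRIL".toList, "APR".toList), ("MAY".toList, "MAY".toList), ("JUNE".toList, "JUN".toList), ("JULY".toList, "JUL".toList), ("AUGUST".toList, "AUG".toList)] [("OCTOBER".toList, "OCT".toList), ("NOVEMBER".toList, "NOV".toList), ("DECEMBER".toList, "DEC".toList)] "SEPTEMBER".toList "SEP".toList u (by decide) (by decide) (by decide)
      rw [pvScanGo_succ_some m hfm, hch]
      have hul : u.length ≤ m := by
        rw [List.length_append, show ("SEPTEMBER".toList).length = 9 from by decide] at hlen; omega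
      have IH := ih m (Nat.lt_succ_self m) u hul
      refine ⟨by have := IH.1; simp only [List.length_append]; omega, ?_⟩
      intro hb
      have hbu : (∃ j, "JANUARYOVEMBER".toList <+: u.drop j) ∨ (∃ j, "JUNEOVEMBER".toList <+: u.drop j) := by
        rcases hb with hb | hb
        · exact Or.inl (pvBadDescend (pvNotPreAppend u (by decide) (by decide)) (by decide) hb)
        · exact Or.inr (pvBadDescend (pvNotPreAppend u (by decide) (by decide)) (by decide) hb)
      have := IH.2 hbu
      simp only [List.length_append]; omega
    by_cases hm10 : "OCTOBER".toList <+: l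
    · obtain ⟨u, rfl⟩ := hm10
      have hfm : pvFirstMatch pvMonthsC ("OCTOBER".toList ++ u) = some ("OCT".toList, u) := by
        simp [pvMonthsC, pvFirstMatch]
      have hch : pvChain ("OCTOBER".toList ++ u) = "OCT".toList ++ pvChain u := by
        simp only [pvChain]
        rw [show pvMonthsC = [("JANUARY".toList, "JAN".toList), ("FEBRUARY".toList, "FEB".toList), ("MARCH".toList, "MAR".toList), ("APRIL".toList, "APR".toList), ("MAY".toList, "MAY".toList), ("JUNE".toList, "JUN".toList), ("JULY".toList, "JUL".toList), ("AUGUST".toList, "AUG".toList), ("SEPTEMBER".toList, "SEP".toList)] ++ ("OCTOBER".toList, "OCT".toList) :: [("NOVEMBER".toList, "NOV".toList), ("DECEMBER".toList, "DEC".toList)] from by decide]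
        exact pvChain_step [("JANUARY".toList, "JAN".toList), ("FEBRUARY".toList, "FEB".toList), ("MARCH".toList, "MAR".toList), ("APRIL".toList, "APR".toList), ("MAY".toList, "MAY".toList), ("JUNE".toList, "JUN".toList), ("JULY".toList, "JUL".toList), ("AUGUST".toList, "AUG".toList), ("SEPTEMBER".toList, "SEP".toList)] [("NOVEMBER".toList, "NOV".toList), ("DECEMBER".toList, "DEC".toList)] "OCTOBER".toList "OCT".toList u (by decide) (by decide) (by decide)
      rw [pvScanGo_succ_some m hfm, hch]
      have hul : u.length ≤ m := by
        rw [List.length_append, show ("OCTOBER".toList).length = 7 from by decide] at hlen; omega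
      have IH := ih m (Nat.lt_succ_self m) u hul
      refine ⟨by have := IH.1; simp only [List.length_append]; omega, ?_⟩
      intro hb
      have hbu : (∃ j, "JANUARYOVEMBER".toList <+: u.drop j) ∨ (∃ j, "JUNEOVEMBER".toList <+: u.drop j) := by
        rcases hb with hb | hb
        · exact Or.inl (pvBadDescend (pvNotPreAppend u (by decide) (by decide)) (by decide) hb)
        · exact Or.inr (pvBadDescend (pvNotPreAppend u (by decide) (by decide)) (by decide) hb)
      have := IH.2 hbu
      simp only [List.length_append]; omega
    by_cases hm11 : "NOVEMBER".toList <+: l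
    · obtain ⟨u, rfl⟩ := hm11
      have hfm : pvFirstMatch pvMonthsC ("NOVEMBER".toList ++ u) = some ("NOV".toList, u) := by
        simp [pvMonthsC, pvFirstMatch]
      have hch : pvChain ("NOVEMBER".toList ++ u) = "NOV".toList ++ pvChain u := by
        simp only [pvChain]
        rw [show pvMonthsC = [("JANUARY".toList, "JAN".toList), ("FEBRUARY".toList, "FEB".toList), ("MARCH".toList, "MAR".toList), ("APRIL".toList, "APR".toList), ("MAY".toList, "MAY".toList), ("JUNE".toList, "JUN".toList), ("JULY".toList, "JUL".toList), ("AUGUST".toList, "AUG".toList), ("SEPTEMBER".toList, "SEP".toList), ("OCTOBER".toList, "OCT".toList)] ++ ("NOVEMBER".toList, "NOV".toList) :: [("DECEMBER".toList, "DEC".toList)] from by decide]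
        exact pvChain_step [("JANUARY".toList, "JAN".toList), ("FEBRUARY".toList, "FEB".toList), ("MARCH".toList, "MAR".toList), ("APRIL".toList, "APR".toList), ("MAY".toList, "MAY".toList), ("JUNE".toList, "JUN".toList), ("JULY".toList, "JUL".toList), ("AUGUST".toList, "AUG".toList), ("SEPTEMBER".toList, "SEP".toList), ("OCTOBER".toList, "OCT".toList)] [("DECEMBER".toList, "DEC".toList)] "NOVEMBER".toList "NOV".toList u (by decide) (by decide) (by decide)
      rw [pvScanGo_succ_some m hfm, hch]
      have hul : u.length ≤ m := by
        rw [List.length_append, show ("NOVEMBER".toList).length = 8 from by decide] at hlen; omega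
      have IH := ih m (Nat.lt_succ_self m) u hul
      refine ⟨by have := IH.1; simp only [List.length_append]; omega, ?_⟩
      intro hb
      have hbu : (∃ j, "JANUARYOVEMBER".toList <+: u.drop j) ∨ (∃ j, "JUNEOVEMBER".toList <+: u.drop j) := by
        rcases hb with hb | hb
        · exact Or.inl (pvBadDescend (pvNotPreAppend u (by decide) (by decide)) (by decide) hb)
        · exact Or.inr (pvBadDescend (pvNotPreAppend u (by decide) (by decide)) (by decide) hb)
      have := IH.2 hbu
      simp only [List.length_append]; omega
    by_cases hm12 : "DECEMBER".toList <+: l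
    · obtain ⟨u, rfl⟩ := hm12
      have hfm : pvFirstMatch pvMonthsC ("DECEMBER".toList ++ u) = some ("DEC".toList, u) := by
        simp [pvMonthsC, pvFirstMatch]
      have hch : pvChain ("DECEMBER".toList ++ u) = "DEC".toList ++ pvChain u := by
        simp only [pvChain]
        rw [show pvMonthsC = [("JANUARY".toList, "JAN".toList), ("FEBRUARY".toList, "FEB".toList), ("MARCH".toList, "MAR".toList), ("APRIL".toList, "APR".toList), ("MAY".toList, "MAY".toList), ("JUNE".toList, "JUN".toList), ("JULY".toList, "JUL".toList), ("AUGUST".toList, "AUG".toList), ("SEPTEMBER".toList, "SEP".toList), ("OCTOBER".toList, "OCT".toList), ("NOVEMBER".toList, "NOV".toList)] ++ ("DECEMBER".toList, "DEC".toList) :: [] from by decide]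
        exact pvChain_step [("JANUARY".toList, "JAN".toList), ("FEBRUARY".toList, "FEB".toList), ("MARCH".toList, "MAR".toList), ("APRIL".toList, "APR".toList), ("MAY".toList, "MAY".toList), ("JUNE".toList, "JUN".toList), ("JULY".toList, "JUL".toList), ("AUGUST".toList, "AUG".toList), ("SEPTEMBER".toList, "SEP".toList), ("OCTOBER".toList, "OCT".toList), ("NOVEMBER".toList, "NOV".toList)] [] "DECEMBER".toList "DEC".toList u (by decide) (by decide) (by decide)
      rw [pvScanGo_succ_some m hfm, hch]
      have hul : u.length ≤ m := by
        rw [List.length_append, show ("DECEMBER".toList).length = 8 from by decide] at hlen; omega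
      have IH := ih m (Nat.lt_succ_self m) u hul
      refine ⟨by have := IH.1; simp only [List.length_append]; omega, ?_⟩
      intro hb
      have hbu : (∃ j, "JANUARYOVEMBER".toList <+: u.drop j) ∨ (∃ j, "JUNEOVEMBER".toList <+: u.drop j) := by
        rcases hb with hb | hb
        · exact Or.inl (pvBadDescend (pvNotPreAppend u (by decide) (by decide)) (by decide) hb)
        · exact Or.inr (pvBadDescend (pvNotPreAppend u (by decide) (by decide)) (by decide) hb)
      have := IH.2 hbu
      simp only [List.length_append]; omega
    cases l with
    | nil =>
      refine ⟨by simp [pvChain, pvMonthsC, pvRep_nil, pvScanGo_succ_nil], ?_⟩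
      rintro (⟨j, hj⟩ | ⟨j, hj⟩) <;> simp only [List.drop_nil] at hj <;>
        exact absurd (List.prefix_nil.mp hj) (by decide)
    | cons c t =>
      have hall : ∀ p ∈ pvMonthsC, ¬ p.1 <+: c :: t := by
        intro p hp
        simp only [pvMonthsC, List.mem_cons, List.not_mem_nil, or_false] at hp
        rcases hp with rfl | rfl | rfl | rfl | rfl | rfl | rfl | rfl | rfl | rfl | rfl | rfl
        exacts [hm1, hm2, hm3, hm4, hm5, hm6, hm7, hm8, hm9, hm10, hm11, hm12]
      rw [pvScanGo_succ_cons m c t (pvFirstMatch_none _ _ hall)]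
      have hcht : pvChain (c :: t) = c :: pvChain t := by
        simp only [pvChain]; exact pvFold_cons pvMonthsC c t hall (by decide)
      rw [hcht]
      have IH := ih m (Nat.lt_succ_self m) t (by simp only [List.length_cons] at hlen; omega)
      refine ⟨by have := IH.1; simp only [List.length_cons]; omega, ?_⟩
      intro hb
      have hbt : (∃ j, "JANUARYOVEMBER".toList <+: t.drop j) ∨ (∃ j, "JUNEOVEMBER".toList <+: t.drop j) := by
        rcases hb with hb | hb
        · exact Or.inl (pvBadDescendCons (fun hp => hm1 ((show "JANUARY".toList <+: "JANUARYOVEMBER".toList from by decide).trans hp)) hb)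
        · exact Or.inr (pvBadDescendCons (fun hp => hm6 ((show "JUNE".toList <+: "JUNEOVEMBER".toList from by decide).trans hp)) hb)
      have := IH.2 hbt
      simp only [List.length_cons]; omega

-- ===== VERDICT (by name: the statement is the Claim_ definition above) =====
theorem standardize_date_value_py_spec : Claim_unchanged_standardize_date_value_py := by
  intro s _ hD
  simp only [standardize_date_value_py, standardize_date_value_py_alt]
  by_cases hs : s = ""
  · simp [hs]
  · rw [if_neg hs, if_neg hs]
    apply String.toList_inj.mp
    rw [String.toList_ofList]
    rw [pvChainA pvMonthsS _ (by decide)]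
    rw [show pvMonthsS.map (fun p => (p.1.toList, p.2.toList)) = pvMonthsC from by decide]
    rw [D_standardize_date_value_py, not_or] at hD
    obtain ⟨hJ, hU⟩ := hD
    rw [Bool.not_eq_true, PySem.Chars.isIn_eq_false_iff] at hJ hU
    rw [← pvNorm_eq s] at hJ hU
    exact pvMain _ _ le_rfl hJ hU

set_option maxRecDepth 100000 in
theorem standardize_date_value_py_changed : Claim_changed_standardize_date_value_py := by
  unfold Claim_changed_standardize_date_value_py; decide

theorem standardize_date_value_py_tight : Claim_exact_standardize_date_value_py := by
  intro s _ hD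
  by_cases hs : s = ""
  · subst hs; exact absurd hD (by decide)
  · simp only [standardize_date_value_py, standardize_date_value_py_alt, if_neg hs]
    intro heq
    have heq' := congrArg String.toList heq
    rw [String.toList_ofList, pvChainA pvMonthsS _ (by decide),
        show pvMonthsS.map (fun p => (p.1.toList, p.2.toList)) = pvMonthsC from by decide] at heq'
    have hbad : (∃ j, "JANUARYOVEMBER".toList <+:
          ((PySem.Str.join " " (PySem.Str.split₀ (PySem.Str.strip (PySem.Str.upper s)))).toList).drop j)
        ∨ (∃ j, "JUNEOVEMBER".toList <+:
          ((PySem.Str.join " " (PySem.Str.split₀ (PySem.Str.strip (PySem.Str.upper s)))).toList).drop j) := by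
      rw [pvNorm_eq s]
      rcases hD with h | h
      · exact Or.inl ((PySem.Chars.exists_prefix_drop_iff_isIn _ _).mpr h)
      · exact Or.inr ((PySem.Chars.exists_prefix_drop_iff_isIn _ _).mpr h)
    have hlt := (pvLen (PySem.Str.join " " (PySem.Str.split₀ (PySem.Str.strip (PySem.Str.upper s)))).toList.length _ le_rfl).2 hbad
    simp only [pvChain] at hlt
    rw [heq'] at hlt
    exact lt_irrefl _ hlt
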